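-- pv_equiv track=rewrite | github.com/volcengine/verl | atropos/environments/intern_bootcamp/internbootcamp_lib/internbootcamp/bootcamp/eereaderdisplay/eereaderdisplay.py | calculate_min_commands
-- ===== SOURCE A (Python) =====
-- def calculate_min_commands(n, grid):
--     """参考C++代码的Python实现，计算最小命令次数"""
--     a = [[0]*(n+2) for _ in range(n+2)]
--     for i in range(1, n+1):
--         for j in range(1, n+1):
--             a[i][j] = int(grid[i-1][j-1])
--
--     ui = [0]*(n+2)
--     uj = [0]*(n+2)
--     ans = 0
--
--     for k in range(n, 0, -1):
--         p = 0
--         # 处理行部分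
--         for i in range(1, k):
--             if p % 2 == 1:
--                 a[i][k] ^= 1
--             if ui[i] % 2 == 1:
--                 a[i][k] ^= 1
--             if a[i][k] != 0:
--                 p ^= 1
--                 ui[i] ^= 1
--                 a[i][k] = 0
--                 ans += 1
--
--         if p % 2 == 1:
--             a[k][k] ^= 1
--         if ui[k] % 2 == 1:
--             a[k][k] ^= 1
--
--         p = 0
--         # 处理列部分
--         for j in range(1, k):
--             if p % 2 == 1:
--                 a[k][j] ^= 1
--             if uj[j] % 2 == 1:
--                 a[k][j] ^= 1
--             if a[k][j] != 0:
--                 p ^= 1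
--                 uj[j] ^= 1
--                 a[k][j] = 0
--                 ans += 1
--
--         if p % 2 == 1:
--             a[k][k] ^= 1
--         if uj[k] % 2 == 1:
--             a[k][k] ^= 1
--
--         if a[k][k] != 0:
--             ans += 1
--             a[k][k] = 0
--
--     return ans
-- ===== SOURCE B (Python) =====
-- def calculate_min_commands(n, grid):
--     """Closed-form count: each command the greedy issues is determined by a
--     diagonal XOR recurrence over the original grid, so the answer is a plain
--     sum of per-cell parities -- no simulation, no flip bookkeeping.
--
--     R[i][k] = parity of commands the greedy issues at cells (i,k') with k'>=k
--     (upper triangle); it satisfies R[i][k] = b(i,k) ^ b(i-1,k) ^ R[i-1][k+1].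
--     Symmetrically Q[i][j] for the lower triangle.  A command is issued at
--     (i,k) iff R[i][k] ^ R[i][k+1]; the diagonal cell (k,k) costs one command
--     iff b(k,k) ^ C[k-1][k] ^ R[k][k+1] ^ P[k][k-1] ^ Q[k+1][k], where
--     C[i][k] = b(i,k) ^ R[i][k+1] and P[i][j] = b(i,j) ^ Q[i+1][j]."""
--     def b(i, j):
--         return 1 <= i <= n and 1 <= j <= n and grid[i - 1][j - 1] == '1'
--
--     R = [[False] * (n + 2) for _ in range(n + 2)]
--     for i in range(1, n + 1):
--         for k in range(1, n + 1):
--             R[i][k] = b(i, k) ^ b(i - 1, k) ^ R[i - 1][k + 1]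
--     Q = [[False] * (n + 2) for _ in range(n + 2)]
--     for j in range(1, n + 1):
--         for i in range(1, n + 1):
--             Q[i][j] = b(i, j) ^ b(i, j - 1) ^ Q[i + 1][j - 1]
--
--     ans = 0
--     for k in range(1, n + 1):
--         for i in range(1, k):
--             if R[i][k] ^ R[i][k + 1]:
--                 ans += 1
--         for j in range(1, k):
--             if Q[k][j] ^ Q[k + 1][j]:
--                 ans += 1
--         if (b(k, k) ^ (b(k - 1, k) ^ R[k - 1][k + 1]) ^ R[k][k + 1]
--                 ^ (b(k, k - 1) ^ Q[k + 1][k - 1]) ^ Q[k + 1][k]):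
--             ans += 1
--     return ans
-- ===== Notes on version B (the rewrite author's own statement) =====
-- stated objective: alternative
-- what changed: Replaces A's stateful greedy simulation (mutable matrix, running pass parity, per-row/column flip accumulators) by a closed-form characterization: each command's presence is a diagonal XOR recurrence value R/Q computed once by a simple DP over the original grid, and the answer is a plain sum of per-cell parities with no simulation state.
-- outside the precondition, e.g. on calculate_min_commands(1, ['2']): A returns 1, B returns 0
import Mathlib
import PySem

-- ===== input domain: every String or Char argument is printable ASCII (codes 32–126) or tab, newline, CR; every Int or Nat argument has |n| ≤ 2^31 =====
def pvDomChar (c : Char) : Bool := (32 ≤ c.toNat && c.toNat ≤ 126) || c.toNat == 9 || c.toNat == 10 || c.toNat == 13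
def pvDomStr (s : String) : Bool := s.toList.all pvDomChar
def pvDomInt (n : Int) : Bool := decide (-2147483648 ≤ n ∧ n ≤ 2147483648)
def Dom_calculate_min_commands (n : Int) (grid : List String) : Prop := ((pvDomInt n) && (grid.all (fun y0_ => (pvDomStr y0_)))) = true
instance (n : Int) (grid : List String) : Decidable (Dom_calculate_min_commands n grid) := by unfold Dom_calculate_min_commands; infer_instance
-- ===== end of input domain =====

-- B replaces A's stateful greedy simulation (mutable matrix, pass parity, flip accumulators)
-- by a closed-form characterization: two diagonal XOR recurrence tables R/Q computed once by a
-- plain DP, the answer a sum of per-cell parities; objective: alternative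
-- (return value only — neither side mutates its arguments).

-- ===== PORT A =====
-- grid[i][j] (0-based); none = IndexError (excluded by Pre_)
def pvCell (grid : List String) (i j : Int) : Option Char :=
  (PySem.List.pyGet? grid i).bind (fun s => PySem.Str.pyGet? s j)

-- a[i][j] on the list-of-lists matrix; every index A uses is nonnegative and in
-- range (the matrix is (n+2)×(n+2) and indices stay in [0,n+1]), so the defaults
-- of these accessors are never hit.
def pvMget (a : List (List Int)) (i j : Int) : Int :=
  (PySem.List.pyGet? ((PySem.List.pyGet? a i).getD []) j).getD 0

def pvMset (a : List (List Int)) (i j : Int) (v : Int) : List (List Int) :=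
  a.set i.toNat (((PySem.List.pyGet? a i).getD []).set j.toNat v)

def pvVget (u : List Int) (i : Int) : Int := (PySem.List.pyGet? u i).getD 0

def pvVset (u : List Int) (i : Int) (v : Int) : List Int := u.set i.toNat v

-- a = [[0]*(n+2) …]; a[i][j] = int(grid[i-1][j-1]) for 1 ≤ i,j ≤ n
def pvInit (n : Int) (grid : List String) : List (List Int) :=
  (PySem.List.pyRange 1 (n+1) 1).foldl (fun a i =>
    (PySem.List.pyRange 1 (n+1) 1).foldl (fun a j =>
      pvMset a i j ((PySem.Int.ofChars? [(pvCell grid (i-1) (j-1)).getD ' ']).getD 0)) a)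
    (List.replicate (n+2).toNat (List.replicate (n+2).toNat 0))

-- body of 'for i in range(1, k)' (row part); state (a, ui, p, ans)
def pvRowStep (k : Int) (st : List (List Int) × List Int × Int × Int) (i : Int) :
    List (List Int) × List Int × Int × Int :=
  let a := st.1; let ui := st.2.1; let p := st.2.2.1; let ans := st.2.2.2
  let a := if PySem.Int.mod p 2 = 1 then pvMset a i k (PySem.Int.bxor (pvMget a i k) 1) else a
  let a := if PySem.Int.mod (pvVget ui i) 2 = 1 then pvMset a i k (PySem.Int.bxor (pvMget a i k) 1) else a
  if pvMget a i k ≠ 0 then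
    (pvMset a i k 0, pvVset ui i (PySem.Int.bxor (pvVget ui i) 1), PySem.Int.bxor p 1, ans + 1)
  else (a, ui, p, ans)

-- body of 'for j in range(1, k)' (column part); state (a, uj, p, ans)
def pvColStep (k : Int) (st : List (List Int) × List Int × Int × Int) (j : Int) :
    List (List Int) × List Int × Int × Int :=
  let a := st.1; let uj := st.2.1; let p := st.2.2.1; let ans := st.2.2.2
  let a := if PySem.Int.mod p 2 = 1 then pvMset a k j (PySem.Int.bxor (pvMget a k j) 1) else a
  let a := if PySem.Int.mod (pvVget uj j) 2 = 1 then pvMset a k j (PySem.Int.bxor (pvMget a k j) 1) else a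
  if pvMget a k j ≠ 0 then
    (pvMset a k j 0, pvVset uj j (PySem.Int.bxor (pvVget uj j) 1), PySem.Int.bxor p 1, ans + 1)
  else (a, uj, p, ans)

-- the two conditional diagonal xors A performs after each part (a[k][k] ^= 1 twice, conditionally)
def pvDiagXor (a : List (List Int)) (k p u : Int) : List (List Int) :=
  let a1 := if PySem.Int.mod p 2 = 1 then pvMset a k k (PySem.Int.bxor (pvMget a k k) 1) else a
  if PySem.Int.mod u 2 = 1 then pvMset a1 k k (PySem.Int.bxor (pvMget a1 k k) 1) else a1

-- body of 'for k in range(n, 0, -1)'; state (a, ui, uj, ans)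
def pvOuterStep (st : List (List Int) × List Int × List Int × Int) (k : Int) :
    List (List Int) × List Int × List Int × Int :=
  let a := st.1; let ui := st.2.1; let uj := st.2.2.1; let ans := st.2.2.2
  let r := (PySem.List.pyRange 1 k 1).foldl (pvRowStep k) (a, ui, 0, ans)
  let a := pvDiagXor r.1 k r.2.2.1 (pvVget r.2.1 k)
  let r2 := (PySem.List.pyRange 1 k 1).foldl (pvColStep k) (a, uj, 0, r.2.2.2)
  let a := pvDiagXor r2.1 k r2.2.2.1 (pvVget r2.2.1 k)
  if pvMget a k k ≠ 0 then (pvMset a k k 0, r.2.1, r2.2.1, r2.2.2.2 + 1)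
  else (a, r.2.1, r2.2.1, r2.2.2.2)

def calculate_min_commands (n : Int) (grid : List String) : Int :=
  ((PySem.List.pyRange n 0 (-1)).foldl pvOuterStep
    (pvInit n grid, List.replicate (n+2).toNat 0, List.replicate (n+2).toNat 0, 0)).2.2.2

-- ===== PORT B =====
-- grid[i][j] == '1' (0-based); the default is never hit inside Pre_
def pvBit (grid : List String) (i j : Int) : Bool :=
  (((PySem.List.pyGet? grid i).bind (fun s => PySem.Str.pyGet? s j)).getD ' ') == '1'

-- b(i, j): the guarded 1-based grid bit of Source B
def pvBgrid (n : Int) (grid : List String) (i j : Int) : Bool :=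
  decide (1 ≤ i) && decide (i ≤ n) && decide (1 ≤ j) && decide (j ≤ n) && pvBit grid (i-1) (j-1)

-- M[i][j] on a list-of-lists Bool matrix (all indices Source B uses are in range)
def pvBget (a : List (List Bool)) (i j : Int) : Bool :=
  (PySem.List.pyGet? ((PySem.List.pyGet? a i).getD []) j).getD false

def pvBset (a : List (List Bool)) (i j : Int) (v : Bool) : List (List Bool) :=
  a.set i.toNat (((PySem.List.pyGet? a i).getD []).set j.toNat v)

-- R[i][k] = b(i,k) ^ b(i-1,k) ^ R[i-1][k+1]
def pvRmat (n : Int) (grid : List String) : List (List Bool) :=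
  (PySem.List.pyRange 1 (n+1) 1).foldl (fun a i =>
    (PySem.List.pyRange 1 (n+1) 1).foldl (fun a k =>
      pvBset a i k ((pvBgrid n grid i k ^^ pvBgrid n grid (i-1) k) ^^ pvBget a (i-1) (k+1))) a)
    (List.replicate (n+2).toNat (List.replicate (n+2).toNat false))

-- Q[i][j] = b(i,j) ^ b(i,j-1) ^ Q[i+1][j-1]
def pvQmat (n : Int) (grid : List String) : List (List Bool) :=
  (PySem.List.pyRange 1 (n+1) 1).foldl (fun a j =>
    (PySem.List.pyRange 1 (n+1) 1).foldl (fun a i =>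
      pvBset a i j ((pvBgrid n grid i j ^^ pvBgrid n grid i (j-1)) ^^ pvBget a (i+1) (j-1))) a)
    (List.replicate (n+2).toNat (List.replicate (n+2).toNat false))

def calculate_min_commands_alt (n : Int) (grid : List String) : Int :=
  let R := pvRmat n grid
  let Q := pvQmat n grid
  (PySem.List.pyRange 1 (n+1) 1).foldl (fun ans k =>
    let ans := (PySem.List.pyRange 1 k 1).foldl
      (fun ans i => if pvBget R i k ^^ pvBget R i (k+1) then ans + 1 else ans) ans
    let ans := (PySem.List.pyRange 1 k 1).foldl
      (fun ans j => if pvBget Q k j ^^ pvBget Q (k+1) j then ans + 1 else ans) ans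
    if (((pvBgrid n grid k k ^^ (pvBgrid n grid (k-1) k ^^ pvBget R (k-1) (k+1))) ^^ pvBget R k (k+1))
        ^^ (pvBgrid n grid k (k-1) ^^ pvBget Q (k+1) (k-1))) ^^ pvBget Q (k+1) k
    then ans + 1 else ans) 0

-- ===== PRECONDITION & SPEC =====
-- Pre_ excludes inputs where A raises (grid rows missing or shorter than n: IndexError;
-- non-digit characters in the n×n block: ValueError) and grids whose n×n block contains
-- digits 2–9, on which A returns but its xor-by-1 arithmetic on multi-bit cell values is
-- an accident of the implementation.
def Pre_calculate_min_commands (n : Int) (grid : List String) : Prop :=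
  n.toNat ≤ grid.length ∧
  ((grid.take n.toNat).all (fun s =>
    decide (n.toNat ≤ s.toList.length) &&
    (s.toList.take n.toNat).all (fun c => c == '0' || c == '1'))) = true
instance (n : Int) (grid : List String) : Decidable (Pre_calculate_min_commands n grid) := by
  unfold Pre_calculate_min_commands; infer_instance

def pvWitness_calculate_min_commands : Int × List String := (2, ["10", "01"])

def Spec_calculate_min_commands (n : Int) (grid : List String) (out : Int) : Prop := out = calculate_min_commands_alt n grid
instance (n : Int) (grid : List String) (out : Int) : Decidable (Spec_calculate_min_commands n grid out) := by unfold Spec_calculate_min_commands; infer_instance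

-- ===== CLAIM (what is proved, stated in full; the proofs are below) =====
def Claim_equal_calculate_min_commands : Prop := ∀ (n : Int) (grid : List String), Dom_calculate_min_commands n grid → Pre_calculate_min_commands n grid → Spec_calculate_min_commands n grid (calculate_min_commands n grid)

-- ===== LEMMAS AND PROOFS =====

-- ===== LEMMAS AND PROOFS =====

-- proof-side intermediate: A's sweep, as a fold over (index, bit) cells with a
-- flip set and running parity (used only to analyse A; B's port does not use it)
def pvSweepStep (st : Int × PySem.Set Int × Bool) (c : Int × Bool) : Int × PySem.Set Int × Bool :=
  if c.2 != (st.2.2 != PySem.Set.contains st.2.1 c.1) then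
    (st.1 + 1, PySem.Set.symmDiff st.2.1 [c.1], !st.2.2)
  else st

def pvSweep (cells : List (Int × Bool)) (flips : PySem.Set Int) : Int × PySem.Set Int × Bool :=
  cells.foldl pvSweepStep (0, flips, false)

def pvIterB (grid : List String) (st : Int × PySem.Set Int × PySem.Set Int) (k : Int) :
    Int × PySem.Set Int × PySem.Set Int :=
  let r1 := pvSweep ((PySem.List.pyRange 0 k 1).map (fun i => (i, pvBit grid i k))) st.2.1
  let d := pvBit grid k k != (r1.2.2 != PySem.Set.contains r1.2.1 k)
  let r2 := pvSweep ((PySem.List.pyRange 0 k 1).map (fun j => (j, pvBit grid k j))) st.2.2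
  let ans := if d != (r2.2.2 != PySem.Set.contains r2.2.1 k) then st.1 + 1 else st.1
  (ans + r1.1 + r2.1, r1.2.1, r2.2.1)

def pvB2i (b : Bool) : Int := if b then 1 else 0

def pvShape (a : List (List Int)) (m : Nat) : Prop :=
  a.length = m ∧ ∀ r ∈ a, r.length = m

theorem pvB2i_mod (b : Bool) : PySem.Int.mod (pvB2i b) 2 = pvB2i b := by cases b <;> decide
theorem pvB2i_bxor1 (b : Bool) : PySem.Int.bxor (pvB2i b) 1 = pvB2i (!b) := by cases b <;> decide

theorem pvRow_eq (a : List (List Int)) (i : Int) (h0 : 0 ≤ i) :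
    (PySem.List.pyGet? a i).getD [] = a.getD i.toNat [] := by
  rw [PySem.List.pyGet?_of_nonneg _ h0]
  rcases h : a[i.toNat]? with _ | r <;> simp_all [List.getD]

theorem pvRow_len (a : List (List Int)) (m : Nat) (i : Int) (hs : pvShape a m)
    (h0 : 0 ≤ i) (hm : i < (m : Int)) :
    ((PySem.List.pyGet? a i).getD []).length = m := by
  rw [pvRow_eq a i h0]
  have hl1 := hs.1
  have hlen : i.toNat < a.length := by omega
  rw [List.getD_eq_getElem a [] hlen]
  exact hs.2 _ (List.getElem_mem hlen)

theorem pvShape_mset (a : List (List Int)) (m : Nat) (i j v : Int) (hs : pvShape a m)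
    (h0 : 0 ≤ i) (hm : i < (m : Int)) :
    pvShape (pvMset a i j v) m := by
  obtain ⟨h1, h2⟩ := hs
  refine ⟨by simpa [pvMset] using h1, ?_⟩
  intro r hr
  rcases List.mem_or_eq_of_mem_set hr with h | h
  · exact h2 r h
  · subst h
    rw [List.length_set]
    exact pvRow_len a m i ⟨h1, h2⟩ h0 hm

theorem pvMget_eq (a : List (List Int)) (i j : Int) (h0 : 0 ≤ i) (hj : 0 ≤ j) :
    pvMget a i j = (a.getD i.toNat []).getD j.toNat 0 := by
  unfold pvMget
  rw [pvRow_eq a i h0, PySem.List.pyGet?_of_nonneg _ hj]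
  rcases h : (a.getD i.toNat [])[j.toNat]? with _ | r <;> simp_all [List.getD]

theorem pvMget_mset_self (a : List (List Int)) (m : Nat) (i j v : Int) (hs : pvShape a m)
    (hi0 : 0 ≤ i) (him : i < (m : Int)) (hj0 : 0 ≤ j) (hjm : j < (m : Int)) :
    pvMget (pvMset a i j v) i j = v := by
  have hl1 := hs.1
  have hlen : i.toNat < a.length := by omega
  have hrl : ((PySem.List.pyGet? a i).getD []).length = m := pvRow_len a m i hs hi0 him
  rw [pvMget_eq _ _ _ hi0 hj0]
  unfold pvMset
  rw [List.getD_eq_getElem _ [] (by rw [List.length_set]; omega)]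
  rw [List.getElem_set_self]
  rw [List.getD_eq_getElem _ 0 (by rw [List.length_set]; omega)]
  rw [List.getElem_set_self]

theorem pvMget_mset_ne (a : List (List Int)) (i j x y v : Int)
    (hi0 : 0 ≤ i) (hj0 : 0 ≤ j) (hx0 : 0 ≤ x) (hy0 : 0 ≤ y)
    (hne : x ≠ i ∨ y ≠ j) :
    pvMget (pvMset a i j v) x y = pvMget a x y := by
  rw [pvMget_eq _ _ _ hx0 hy0, pvMget_eq _ _ _ hx0 hy0]
  unfold pvMset
  by_cases hxi : x = i
  · subst hxi
    have hyj : y ≠ j := by tauto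
    have hyj' : y.toNat ≠ j.toNat := by omega
    by_cases hlen : x.toNat < a.length
    · rw [List.getD_eq_getElem _ [] (by rw [List.length_set]; omega),
          List.getElem_set_self, pvRow_eq a x hx0,
          List.getD_eq_getElem a [] hlen]
      by_cases hj2 : y.toNat < (a[x.toNat].set j.toNat v).length
      · rw [List.getD_eq_getElem _ 0 hj2, List.getElem_set_ne (by omega),
            List.getD_eq_getElem _ 0 (by rw [List.length_set] at hj2; omega)]
      · rw [List.length_set] at hj2
        rw [List.getD_eq_default _ 0 (by rw [List.length_set]; omega),
            List.getD_eq_default _ 0 (by omega)]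
    · rw [List.set_eq_of_length_le (by omega)]
  · have : x.toNat ≠ i.toNat ∨ a.length ≤ i.toNat := by omega
    rcases this with h | h
    · have hrow : (a.set i.toNat (((PySem.List.pyGet? a i).getD []).set j.toNat v)).getD x.toNat []
          = a.getD x.toNat [] := by
        rw [List.getD_eq_getElem?_getD, List.getElem?_set_ne (by omega), ← List.getD_eq_getElem?_getD]
      rw [hrow]
    · rw [List.set_eq_of_length_le (by omega)]

theorem pvVget_eq (u : List Int) (i : Int) (h0 : 0 ≤ i) :
    pvVget u i = u.getD i.toNat 0 := by
  unfold pvVget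
  rw [PySem.List.pyGet?_of_nonneg _ h0]
  rcases h : u[i.toNat]? with _ | r <;> simp_all [List.getD]

theorem pvVget_vset_self (u : List Int) (i v : Int) (h0 : 0 ≤ i) (hl : i < (u.length : Int)) :
    pvVget (pvVset u i v) i = v := by
  rw [pvVget_eq _ _ h0]
  unfold pvVset
  rw [List.getD_eq_getElem _ 0 (by rw [List.length_set]; omega), List.getElem_set_self]

theorem pvVget_vset_ne (u : List Int) (i x v : Int) (h0 : 0 ≤ i) (hx0 : 0 ≤ x) (hne : x ≠ i) :
    pvVget (pvVset u i v) x = pvVget u x := by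
  rw [pvVget_eq _ _ hx0, pvVget_eq _ _ hx0]
  unfold pvVset
  rw [List.getD_eq_getElem?_getD, List.getElem?_set_ne (by omega), ← List.getD_eq_getElem?_getD]

-- original 0/1 cell value, 1-based coordinates
def pvOrig (grid : List String) (x y : Int) : Int := pvB2i (pvBit grid (x-1) (y-1))

-- the matrix holds original values on the whole K×K top-left block (1-based)
def pvOrigOn (grid : List String) (a : List (List Int)) (K : Int) : Prop :=
  ∀ x y : Int, 1 ≤ x → x ≤ K → 1 ≤ y → y ≤ K → pvMget a x y = pvOrig grid x y

-- A's parity array ui/uj (1-based) matches the sweep's flip set (0-based)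
def pvFrRel (n : Int) (u : List Int) (fl : PySem.Set Int) : Prop :=
  u.length = (n+2).toNat ∧
  ∀ i : Int, 1 ≤ i → i ≤ n → pvVget u i = pvB2i (PySem.Set.contains fl (i-1))

-- one conditional xor write A performs on one cell
theorem pvCondStep (a : List (List Int)) (m : Nat) (x y : Int) (cb vb : Bool)
    (hs : pvShape a m) (hx0 : 0 ≤ x) (hxm : x < (m : Int)) (hy0 : 0 ≤ y) (hym : y < (m : Int))
    (hv : pvMget a x y = pvB2i vb) :
    pvShape (if PySem.Int.mod (pvB2i cb) 2 = 1 then pvMset a x y (PySem.Int.bxor (pvMget a x y) 1) else a) m ∧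
    pvMget (if PySem.Int.mod (pvB2i cb) 2 = 1 then pvMset a x y (PySem.Int.bxor (pvMget a x y) 1) else a) x y
      = pvB2i (vb != cb) ∧
    (∀ x' y' : Int, 0 ≤ x' → 0 ≤ y' → (x' ≠ x ∨ y' ≠ y) →
      pvMget (if PySem.Int.mod (pvB2i cb) 2 = 1 then pvMset a x y (PySem.Int.bxor (pvMget a x y) 1) else a) x' y'
        = pvMget a x' y') := by
  rw [pvB2i_mod]
  cases cb
  · rw [if_neg (by decide)]
    exact ⟨hs, by rw [hv, Bool.bne_false], fun _ _ _ _ _ => rfl⟩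
  · rw [if_pos (by decide)]
    refine ⟨pvShape_mset a m x y _ hs hx0 hxm, ?_, ?_⟩
    · rw [pvMget_mset_self a m x y _ hs hx0 hxm hy0 hym, hv, pvB2i_bxor1]
      cases vb <;> rfl
    · intro x' y' hx' hy' hne
      exact pvMget_mset_ne a x y x' y' _ hx0 hy0 hx' hy' hne

-- the two conditional xor writes A performs on one cell
theorem pvCondXor (a : List (List Int)) (m : Nat) (x y p u : Int) (vb pb ub : Bool)
    (a1 a2 : List (List Int)) (hs : pvShape a m)
    (hx0 : 0 ≤ x) (hxm : x < (m : Int)) (hy0 : 0 ≤ y) (hym : y < (m : Int))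
    (hv : pvMget a x y = pvB2i vb) (hp : p = pvB2i pb) (hu : u = pvB2i ub)
    (hA1 : a1 = if PySem.Int.mod p 2 = 1 then pvMset a x y (PySem.Int.bxor (pvMget a x y) 1) else a)
    (hA2 : a2 = if PySem.Int.mod u 2 = 1 then pvMset a1 x y (PySem.Int.bxor (pvMget a1 x y) 1) else a1) :
    pvShape a2 m ∧ pvMget a2 x y = pvB2i (vb != (pb != ub)) ∧
    (∀ x' y' : Int, 0 ≤ x' → 0 ≤ y' → (x' ≠ x ∨ y' ≠ y) → pvMget a2 x' y' = pvMget a x' y') := by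
  subst hp hu
  obtain ⟨hs1, hv1, ho1⟩ := pvCondStep a m x y pb vb hs hx0 hxm hy0 hym hv
  rw [← hA1] at hs1 hv1 ho1
  obtain ⟨hs2, hv2, ho2⟩ := pvCondStep a1 m x y ub (vb != pb) hs1 hx0 hxm hy0 hym hv1
  rw [← hA2] at hs2 hv2 ho2
  refine ⟨hs2, ?_, ?_⟩
  · rw [hv2]; cases vb <;> cases pb <;> cases ub <;> rfl
  · intro x' y' hx' hy' hne
    rw [ho2 x' y' hx' hy' hne, ho1 x' y' hx' hy' hne]

-- under Pre_, every cell of the n×n block is the character '0' or '1'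
theorem pvPreChar (n : Int) (grid : List String) (hpre : Pre_calculate_min_commands n grid)
    (x y : Int) (hx0 : 0 ≤ x) (hxn : x < n) (hy0 : 0 ≤ y) (hyn : y < n) :
    ∃ c, pvCell grid x y = some c ∧ (c = '0' ∨ c = '1') := by
  obtain ⟨hlen, hall⟩ := hpre
  rw [List.all_eq_true] at hall
  have hxl : x.toNat < grid.length := by omega
  have hmem : grid[x.toNat] ∈ grid.take n.toNat := by
    have h1 : x.toNat < (grid.take n.toNat).length := by rw [List.length_take]; omega
    have h2 : (grid.take n.toNat)[x.toNat] = grid[x.toNat] := List.getElem_take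
    rw [← h2]; exact List.getElem_mem h1
  have hs' := hall _ hmem
  rw [Bool.and_eq_true, decide_eq_true_eq, List.all_eq_true] at hs'
  obtain ⟨hslen, hchar⟩ := hs'
  set s := grid[x.toNat] with hsdef
  have hyl : y.toNat < s.toList.length := by omega
  have hcmem : s.toList[y.toNat] ∈ s.toList.take n.toNat := by
    have h1 : y.toNat < (s.toList.take n.toNat).length := by rw [List.length_take]; omega
    have h2 : (s.toList.take n.toNat)[y.toNat] = s.toList[y.toNat] := List.getElem_take
    rw [← h2]; exact List.getElem_mem h1
  refine ⟨s.toList[y.toNat], ?_, by have := hchar _ hcmem; simpa using this⟩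
  unfold pvCell
  rw [PySem.List.pyGet?_of_nonneg _ hx0, List.getElem?_eq_getElem hxl]
  simp only [Option.bind_some, ← hsdef]
  rw [PySem.Str.pyGet?_eq, PySem.Chars.pyGet?_eq_listPyGet?, PySem.List.pyGet?_of_nonneg _ hy0]
  exact List.getElem?_eq_getElem hyl

theorem pvBit_eq_of_cell (grid : List String) (x y : Int) (c : Char)
    (h : pvCell grid x y = some c) : pvBit grid x y = (c == '1') := by
  unfold pvBit
  unfold pvCell at h
  rw [h, Option.getD_some]

theorem pvInitVal (n : Int) (grid : List String) (hpre : Pre_calculate_min_commands n grid)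
    (i j : Int) (hi1 : 1 ≤ i) (hin : i ≤ n) (hj1 : 1 ≤ j) (hjn : j ≤ n) :
    ((PySem.Int.ofChars? [(pvCell grid (i-1) (j-1)).getD ' ']).getD 0) = pvOrig grid i j := by
  obtain ⟨c, hc, hcv⟩ := pvPreChar n grid hpre (i-1) (j-1) (by omega) (by omega) (by omega) (by omega)
  rw [hc]
  unfold pvOrig
  rw [pvBit_eq_of_cell grid (i-1) (j-1) c hc]
  rcases hcv with h | h <;> subst h <;> decide

-- the value A writes into cell (i,j) while building the matrix
def pvIVal (grid : List String) (i j : Int) : Int :=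
  (PySem.Int.ofChars? [(pvCell grid (i-1) (j-1)).getD ' ']).getD 0

theorem pvInitInner (n : Int) (grid : List String) (hn : 0 ≤ n) (i : Int)
    (hi1 : 1 ≤ i) (hin : i ≤ n) :
    ∀ (m : Nat) (j0 : Int), 1 ≤ j0 → j0 + m = n + 1 → ∀ a, pvShape a (n+2).toNat →
    pvShape ((PySem.List.pyRange j0 (n+1) 1).foldl (fun a j => pvMset a i j (pvIVal grid i j)) a) (n+2).toNat ∧
    (∀ y : Int, j0 ≤ y → y ≤ n →
      pvMget ((PySem.List.pyRange j0 (n+1) 1).foldl (fun a j => pvMset a i j (pvIVal grid i j)) a) i y = pvIVal grid i y) ∧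
    (∀ x y : Int, 0 ≤ x → 0 ≤ y → (x ≠ i ∨ y < j0) →
      pvMget ((PySem.List.pyRange j0 (n+1) 1).foldl (fun a j => pvMset a i j (pvIVal grid i j)) a) x y = pvMget a x y) := by
  intro m
  induction m with
  | zero =>
    intro j0 h1 h2 a hs
    rw [PySem.List.pyRange_one_eq_nil (by omega)]
    exact ⟨hs, by intro y hy1 hy2; omega, fun _ _ _ _ _ => rfl⟩
  | succ m ih =>
    intro j0 h1 h2 a hs
    have hm : ((n+2).toNat : Int) = n + 2 := by omega
    rw [PySem.List.pyRange_one_cons (by omega), List.foldl_cons]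
    have hs1 : pvShape (pvMset a i j0 (pvIVal grid i j0)) (n+2).toNat :=
      pvShape_mset a _ i j0 _ hs (by omega) (by omega)
    obtain ⟨ihs, ihset, ihold⟩ := ih (j0+1) (by omega) (by omega) _ hs1
    refine ⟨ihs, ?_, ?_⟩
    · intro y hy1 hy2
      rcases eq_or_lt_of_le hy1 with h | h
      · subst h
        rw [ihold i j0 (by omega) (by omega) (Or.inr (by omega)),
            pvMget_mset_self a _ i j0 _ hs (by omega) (by omega) (by omega) (by omega)]
      · exact ihset y (by omega) hy2
    · intro x y hx hy hne
      rw [ihold x y hx hy (by rcases hne with h | h; exact Or.inl h; exact Or.inr (by omega)),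
          pvMget_mset_ne a i j0 x y _ (by omega) (by omega) hx hy
            (by rcases hne with h | h; exact Or.inl h; exact Or.inr (by omega))]

theorem pvInitOuter (n : Int) (grid : List String) (hn : 0 ≤ n) :
    ∀ (m : Nat) (i0 : Int), 1 ≤ i0 → i0 + m = n + 1 → ∀ a, pvShape a (n+2).toNat →
    pvShape ((PySem.List.pyRange i0 (n+1) 1).foldl (fun a i =>
      (PySem.List.pyRange 1 (n+1) 1).foldl (fun a j => pvMset a i j (pvIVal grid i j)) a) a) (n+2).toNat ∧
    (∀ x y : Int, i0 ≤ x → x ≤ n → 1 ≤ y → y ≤ n →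
      pvMget ((PySem.List.pyRange i0 (n+1) 1).foldl (fun a i =>
        (PySem.List.pyRange 1 (n+1) 1).foldl (fun a j => pvMset a i j (pvIVal grid i j)) a) a) x y = pvIVal grid x y) ∧
    (∀ x y : Int, 0 ≤ x → 0 ≤ y → x < i0 →
      pvMget ((PySem.List.pyRange i0 (n+1) 1).foldl (fun a i =>
        (PySem.List.pyRange 1 (n+1) 1).foldl (fun a j => pvMset a i j (pvIVal grid i j)) a) a) x y = pvMget a x y) := by
  intro m
  induction m with
  | zero =>
    intro i0 h1 h2 a hs
    rw [show PySem.List.pyRange i0 (n+1) 1 = [] from PySem.List.pyRange_one_eq_nil (by omega)]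
    refine ⟨hs, ?_, ?_⟩
    · intro x y hx1 hx2 _ _; omega
    · intro _ _ _ _ _; rfl
  | succ m ih =>
    intro i0 h1 h2 a hs
    rw [show PySem.List.pyRange i0 (n+1) 1 = i0 :: PySem.List.pyRange (i0+1) (n+1) 1 from PySem.List.pyRange_one_cons (by omega), List.foldl_cons]
    obtain ⟨hs1, hset1, hold1⟩ := pvInitInner n grid hn i0 h1 (by omega) (n+1-1).toNat 1 (by omega) (by omega) a hs
    obtain ⟨ihs, ihset, ihold⟩ := ih (i0+1) (by omega) (by omega) _ hs1
    refine ⟨ihs, ?_, ?_⟩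
    · intro x y hx1 hx2 hy1 hy2
      rcases eq_or_lt_of_le hx1 with h | h
      · subst h
        rw [ihold i0 y (by omega) (by omega) (by omega), hset1 y hy1 hy2]
      · exact ihset x y (by omega) hx2 hy1 hy2
    · intro x y hx hy hlt
      rw [ihold x y hx hy (by omega), hold1 x y hx hy (Or.inl (by omega))]

theorem pvContains_symmDiff_single (fl : PySem.Set Int) (z x : Int) :
    PySem.Set.contains (PySem.Set.symmDiff fl [z]) x
      = if x = z then !(PySem.Set.contains fl z) else PySem.Set.contains fl x := by
  have hmain : (PySem.Set.contains (PySem.Set.symmDiff fl [z]) x = true)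
      ↔ ((if x = z then !(PySem.Set.contains fl z) else PySem.Set.contains fl x) = true) := by
    rw [PySem.Set.contains_iff, PySem.Set.mem_symmDiff]
    by_cases h : x = z
    · subst h
      rw [if_pos rfl]
      simp
    · rw [if_neg h]
      simp [h]
  cases hA : PySem.Set.contains (PySem.Set.symmDiff fl [z]) x <;>
    cases hb : (if x = z then !(PySem.Set.contains fl z) else PySem.Set.contains fl x) <;>
      simp_all <;> split_ifs at * <;> simp_all

theorem pvRowPass (n k : Int) (grid : List String) (hn : 0 ≤ n) (hk1 : 1 ≤ k) (hkn : k ≤ n) :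
    ∀ (m : Nat) (i0 : Int), 1 ≤ i0 → i0 + m = k →
    ∀ (a : List (List Int)) (ui : List Int) (p ans cB : Int) (fl : PySem.Set Int) (pB : Bool),
    pvShape a (n+2).toNat →
    (∀ i : Int, i0 ≤ i → i < k → pvMget a i k = pvOrig grid i k) →
    pvFrRel n ui fl →
    p = pvB2i pB →
    ∀ rA rB, rA = (PySem.List.pyRange i0 k 1).foldl (pvRowStep k) (a, ui, p, ans) →
    rB = ((PySem.List.pyRange (i0-1) (k-1) 1).map (fun i => (i, pvBit grid i (k-1)))).foldl pvSweepStep (cB, fl, pB) →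
    pvShape rA.1 (n+2).toNat ∧
    rA.2.2.2 = ans + (rB.1 - cB) ∧
    rA.2.2.1 = pvB2i rB.2.2 ∧
    pvFrRel n rA.2.1 rB.2.1 ∧
    (∀ x y : Int, 0 ≤ x → 0 ≤ y → (y ≠ k ∨ x < i0 ∨ k ≤ x) → pvMget rA.1 x y = pvMget a x y) := by
  intro m
  induction m with
  | zero =>
    intro i0 h1 h2 a ui p ans cB fl pB hs horig hfr hp rA rB hA hB
    rw [show PySem.List.pyRange i0 k 1 = [] from PySem.List.pyRange_one_eq_nil (by omega)] at hA
    rw [show PySem.List.pyRange (i0-1) (k-1) 1 = [] from PySem.List.pyRange_one_eq_nil (by omega)] at hB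
    simp only [List.map_nil, List.foldl_nil] at hA hB
    subst hA hB
    exact ⟨hs, by simp, hp, hfr, fun _ _ _ _ _ => rfl⟩
  | succ m ih =>
    intro i0 h1 h2 a ui p ans cB fl pB hs horig hfr hp rA rB hA hB
    rw [show PySem.List.pyRange i0 k 1 = i0 :: PySem.List.pyRange (i0+1) k 1 from
          PySem.List.pyRange_one_cons (by omega), List.foldl_cons] at hA
    have hconsB : PySem.List.pyRange (i0-1) (k-1) 1 = (i0-1) :: PySem.List.pyRange i0 (k-1) 1 := by
      rw [PySem.List.pyRange_one_cons (by omega), sub_add_cancel]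
    rw [hconsB, List.map_cons, List.foldl_cons] at hB
    -- names for the step data
    set vb := pvBit grid (i0-1) (k-1) with hvb
    set mem := PySem.Set.contains fl (i0-1) with hmem
    have hm2 : ((n+2).toNat : Int) = n + 2 := by omega
    have hui : pvVget ui i0 = pvB2i mem := hfr.2 i0 h1 (by omega)
    have hv : pvMget a i0 k = pvB2i vb := by
      rw [horig i0 (by omega) (by omega)]; rfl
    obtain ⟨hs2, hv2, ho2⟩ := pvCondXor a (n+2).toNat i0 k p (pvVget ui i0) vb pB mem
      (if PySem.Int.mod p 2 = 1 then pvMset a i0 k (PySem.Int.bxor (pvMget a i0 k) 1) else a)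
      _ hs (by omega) (by omega) (by omega) (by omega) hv hp hui rfl rfl
    set a2 := (if PySem.Int.mod (pvVget ui i0) 2 = 1 then
        pvMset (if PySem.Int.mod p 2 = 1 then pvMset a i0 k (PySem.Int.bxor (pvMget a i0 k) 1) else a) i0 k
          (PySem.Int.bxor (pvMget (if PySem.Int.mod p 2 = 1 then pvMset a i0 k (PySem.Int.bxor (pvMget a i0 k) 1) else a) i0 k) 1)
      else (if PySem.Int.mod p 2 = 1 then pvMset a i0 k (PySem.Int.bxor (pvMget a i0 k) 1) else a)) with ha2
    have hstepA : pvRowStep k (a, ui, p, ans) i0 =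
        if pvMget a2 i0 k ≠ 0 then
          (pvMset a2 i0 k 0, pvVset ui i0 (PySem.Int.bxor (pvVget ui i0) 1), PySem.Int.bxor p 1, ans + 1)
        else (a2, ui, p, ans) := rfl
    have hstepB : pvSweepStep (cB, fl, pB) (i0-1, vb) =
        if (vb != (pB != mem)) then (cB + 1, PySem.Set.symmDiff fl [i0-1], !pB) else (cB, fl, pB) := rfl
    cases heff : (vb != (pB != mem)) with
    | true =>
      rw [hstepA, if_pos (by rw [hv2, heff]; decide)] at hA
      rw [hstepB, if_pos (by rw [heff])] at hB
      have hshape3 : pvShape (pvMset a2 i0 k 0) (n+2).toNat :=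
        pvShape_mset a2 _ i0 k _ hs2 (by omega) (by omega)
      have horig3 : ∀ i : Int, i0+1 ≤ i → i < k → pvMget (pvMset a2 i0 k 0) i k = pvOrig grid i k := by
        intro i hi1 hi2
        rw [pvMget_mset_ne a2 i0 k i k _ (by omega) (by omega) (by omega) (by omega) (Or.inl (by omega)),
            ho2 i k (by omega) (by omega) (Or.inl (by omega))]
        exact horig i (by omega) hi2
      have hfr3 : pvFrRel n (pvVset ui i0 (PySem.Int.bxor (pvVget ui i0) 1)) (PySem.Set.symmDiff fl [i0-1]) := by
        refine ⟨by rw [pvVset, List.length_set]; exact hfr.1, ?_⟩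
        intro i hi1 hin
        by_cases hieq : i = i0
        · rw [hieq]
          rw [pvVget_vset_self ui i0 _ (by omega) (by rw [hfr.1]; omega), hui, pvB2i_bxor1,
              pvContains_symmDiff_single, if_pos rfl, hmem]
        · rw [pvVget_vset_ne ui i0 i _ (by omega) (by omega) hieq, hfr.2 i hi1 hin,
              pvContains_symmDiff_single, if_neg (by omega)]
      obtain ⟨c1, c2, c3, c4, c5⟩ := ih (i0+1) (by omega) (by omega) (pvMset a2 i0 k 0)
        (pvVset ui i0 (PySem.Int.bxor (pvVget ui i0) 1)) (PySem.Int.bxor p 1) (ans + 1)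
        (cB + 1) (PySem.Set.symmDiff fl [i0-1]) (!pB)
        hshape3 horig3 hfr3 (by rw [hp, pvB2i_bxor1]) rA rB hA
        (by rw [show (i0:Int) + 1 - 1 = i0 from by ring]; exact hB)
      refine ⟨c1, by omega, c3, c4, ?_⟩
      intro x y hx hy hcond
      rw [c5 x y hx hy (by rcases hcond with h | h | h; exacts [Or.inl h, Or.inr (Or.inl (by omega)), Or.inr (Or.inr h)])]
      rw [pvMget_mset_ne a2 i0 k x y _ (by omega) (by omega) hx hy (by
            rcases hcond with h | h | h
            · exact Or.inr h
            · exact Or.inl (by omega)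
            · exact Or.inl (by omega))]
      exact ho2 x y hx hy (by
            rcases hcond with h | h | h
            · exact Or.inr h
            · exact Or.inl (by omega)
            · exact Or.inl (by omega))
    | false =>
      rw [hstepA, if_neg (by rw [hv2, heff]; decide)] at hA
      rw [hstepB, if_neg (by rw [heff]; exact Bool.false_ne_true)] at hB
      have horig3 : ∀ i : Int, i0+1 ≤ i → i < k → pvMget a2 i k = pvOrig grid i k := by
        intro i hi1 hi2
        rw [ho2 i k (by omega) (by omega) (Or.inl (by omega))]
        exact horig i (by omega) hi2
      obtain ⟨c1, c2, c3, c4, c5⟩ := ih (i0+1) (by omega) (by omega) a2 ui p ans cB fl pB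
        hs2 horig3 hfr hp rA rB hA
        (by rw [show (i0:Int) + 1 - 1 = i0 from by ring]; exact hB)
      refine ⟨c1, c2, c3, c4, ?_⟩
      intro x y hx hy hcond
      rw [c5 x y hx hy (by rcases hcond with h | h | h; exacts [Or.inl h, Or.inr (Or.inl (by omega)), Or.inr (Or.inr h)])]
      exact ho2 x y hx hy (by
            rcases hcond with h | h | h
            · exact Or.inr h
            · exact Or.inl (by omega)
            · exact Or.inl (by omega))

theorem pvColPass (n k : Int) (grid : List String) (hn : 0 ≤ n) (hk1 : 1 ≤ k) (hkn : k ≤ n) :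
    ∀ (m : Nat) (j0 : Int), 1 ≤ j0 → j0 + m = k →
    ∀ (a : List (List Int)) (uj : List Int) (p ans cB : Int) (fl : PySem.Set Int) (pB : Bool),
    pvShape a (n+2).toNat →
    (∀ j : Int, j0 ≤ j → j < k → pvMget a k j = pvOrig grid k j) →
    pvFrRel n uj fl →
    p = pvB2i pB →
    ∀ rA rB, rA = (PySem.List.pyRange j0 k 1).foldl (pvColStep k) (a, uj, p, ans) →
    rB = ((PySem.List.pyRange (j0-1) (k-1) 1).map (fun j => (j, pvBit grid (k-1) j))).foldl pvSweepStep (cB, fl, pB) →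
    pvShape rA.1 (n+2).toNat ∧
    rA.2.2.2 = ans + (rB.1 - cB) ∧
    rA.2.2.1 = pvB2i rB.2.2 ∧
    pvFrRel n rA.2.1 rB.2.1 ∧
    (∀ x y : Int, 0 ≤ x → 0 ≤ y → (x ≠ k ∨ y < j0 ∨ k ≤ y) → pvMget rA.1 x y = pvMget a x y) := by
  intro m
  induction m with
  | zero =>
    intro j0 h1 h2 a uj p ans cB fl pB hs horig hfr hp rA rB hA hB
    rw [show PySem.List.pyRange j0 k 1 = [] from PySem.List.pyRange_one_eq_nil (by omega)] at hA
    rw [show PySem.List.pyRange (j0-1) (k-1) 1 = [] from PySem.List.pyRange_one_eq_nil (by omega)] at hB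
    simp only [List.map_nil, List.foldl_nil] at hA hB
    subst hA hB
    exact ⟨hs, by simp, hp, hfr, fun _ _ _ _ _ => rfl⟩
  | succ m ih =>
    intro j0 h1 h2 a uj p ans cB fl pB hs horig hfr hp rA rB hA hB
    rw [show PySem.List.pyRange j0 k 1 = j0 :: PySem.List.pyRange (j0+1) k 1 from
          PySem.List.pyRange_one_cons (by omega), List.foldl_cons] at hA
    have hconsB : PySem.List.pyRange (j0-1) (k-1) 1 = (j0-1) :: PySem.List.pyRange j0 (k-1) 1 := by
      rw [PySem.List.pyRange_one_cons (by omega), sub_add_cancel]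
    rw [hconsB, List.map_cons, List.foldl_cons] at hB
    set vb := pvBit grid (k-1) (j0-1) with hvb
    set mem := PySem.Set.contains fl (j0-1) with hmem
    have hm2 : ((n+2).toNat : Int) = n + 2 := by omega
    have hui : pvVget uj j0 = pvB2i mem := hfr.2 j0 h1 (by omega)
    have hv : pvMget a k j0 = pvB2i vb := by
      rw [horig j0 (by omega) (by omega)]; rfl
    obtain ⟨hs2, hv2, ho2⟩ := pvCondXor a (n+2).toNat k j0 p (pvVget uj j0) vb pB mem
      (if PySem.Int.mod p 2 = 1 then pvMset a k j0 (PySem.Int.bxor (pvMget a k j0) 1) else a)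
      _ hs (by omega) (by omega) (by omega) (by omega) hv hp hui rfl rfl
    set a2 := (if PySem.Int.mod (pvVget uj j0) 2 = 1 then
        pvMset (if PySem.Int.mod p 2 = 1 then pvMset a k j0 (PySem.Int.bxor (pvMget a k j0) 1) else a) k j0
          (PySem.Int.bxor (pvMget (if PySem.Int.mod p 2 = 1 then pvMset a k j0 (PySem.Int.bxor (pvMget a k j0) 1) else a) k j0) 1)
      else (if PySem.Int.mod p 2 = 1 then pvMset a k j0 (PySem.Int.bxor (pvMget a k j0) 1) else a)) with ha2
    have hstepA : pvColStep k (a, uj, p, ans) j0 =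
        if pvMget a2 k j0 ≠ 0 then
          (pvMset a2 k j0 0, pvVset uj j0 (PySem.Int.bxor (pvVget uj j0) 1), PySem.Int.bxor p 1, ans + 1)
        else (a2, uj, p, ans) := rfl
    have hstepB : pvSweepStep (cB, fl, pB) (j0-1, vb) =
        if (vb != (pB != mem)) then (cB + 1, PySem.Set.symmDiff fl [j0-1], !pB) else (cB, fl, pB) := rfl
    cases heff : (vb != (pB != mem)) with
    | true =>
      rw [hstepA, if_pos (by rw [hv2, heff]; decide)] at hA
      rw [hstepB, if_pos (by rw [heff])] at hB
      have hshape3 : pvShape (pvMset a2 k j0 0) (n+2).toNat :=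
        pvShape_mset a2 _ k j0 _ hs2 (by omega) (by omega)
      have horig3 : ∀ j : Int, j0+1 ≤ j → j < k → pvMget (pvMset a2 k j0 0) k j = pvOrig grid k j := by
        intro j hj1 hj2
        rw [pvMget_mset_ne a2 k j0 k j _ (by omega) (by omega) (by omega) (by omega) (Or.inr (by omega)),
            ho2 k j (by omega) (by omega) (Or.inr (by omega))]
        exact horig j (by omega) hj2
      have hfr3 : pvFrRel n (pvVset uj j0 (PySem.Int.bxor (pvVget uj j0) 1)) (PySem.Set.symmDiff fl [j0-1]) := by
        refine ⟨by rw [pvVset, List.length_set]; exact hfr.1, ?_⟩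
        intro i hi1 hin
        by_cases hieq : i = j0
        · rw [hieq]
          rw [pvVget_vset_self uj j0 _ (by omega) (by rw [hfr.1]; omega), hui, pvB2i_bxor1,
              pvContains_symmDiff_single, if_pos rfl, hmem]
        · rw [pvVget_vset_ne uj j0 i _ (by omega) (by omega) hieq, hfr.2 i hi1 hin,
              pvContains_symmDiff_single, if_neg (by omega)]
      obtain ⟨c1, c2, c3, c4, c5⟩ := ih (j0+1) (by omega) (by omega) (pvMset a2 k j0 0)
        (pvVset uj j0 (PySem.Int.bxor (pvVget uj j0) 1)) (PySem.Int.bxor p 1) (ans + 1)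
        (cB + 1) (PySem.Set.symmDiff fl [j0-1]) (!pB)
        hshape3 horig3 hfr3 (by rw [hp, pvB2i_bxor1]) rA rB hA
        (by rw [show (j0:Int) + 1 - 1 = j0 from by ring]; exact hB)
      refine ⟨c1, by omega, c3, c4, ?_⟩
      intro x y hx hy hcond
      rw [c5 x y hx hy (by rcases hcond with h | h | h; exacts [Or.inl h, Or.inr (Or.inl (by omega)), Or.inr (Or.inr h)])]
      rw [pvMget_mset_ne a2 k j0 x y _ (by omega) (by omega) hx hy (by
            rcases hcond with h | h | h
            · exact Or.inl h
            · exact Or.inr (by omega)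
            · exact Or.inr (by omega))]
      exact ho2 x y hx hy (by
            rcases hcond with h | h | h
            · exact Or.inl h
            · exact Or.inr (by omega)
            · exact Or.inr (by omega))
    | false =>
      rw [hstepA, if_neg (by rw [hv2, heff]; decide)] at hA
      rw [hstepB, if_neg (by rw [heff]; exact Bool.false_ne_true)] at hB
      have horig3 : ∀ j : Int, j0+1 ≤ j → j < k → pvMget a2 k j = pvOrig grid k j := by
        intro j hj1 hj2
        rw [ho2 k j (by omega) (by omega) (Or.inr (by omega))]
        exact horig j (by omega) hj2
      obtain ⟨c1, c2, c3, c4, c5⟩ := ih (j0+1) (by omega) (by omega) a2 uj p ans cB fl pB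
        hs2 horig3 hfr hp rA rB hA
        (by rw [show (j0:Int) + 1 - 1 = j0 from by ring]; exact hB)
      refine ⟨c1, c2, c3, c4, ?_⟩
      intro x y hx hy hcond
      rw [c5 x y hx hy (by rcases hcond with h | h | h; exacts [Or.inl h, Or.inr (Or.inl (by omega)), Or.inr (Or.inr h)])]
      exact ho2 x y hx hy (by
            rcases hcond with h | h | h
            · exact Or.inl h
            · exact Or.inr (by omega)
            · exact Or.inr (by omega))

theorem pvDiagXor_spec (a : List (List Int)) (n : Int) (k p u : Int) (vb pb ub : Bool)
    (hn : 0 ≤ n) (hs : pvShape a (n+2).toNat) (hk0 : 0 ≤ k) (hkm : k < n + 2)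
    (hv : pvMget a k k = pvB2i vb) (hp : p = pvB2i pb) (hu : u = pvB2i ub) :
    pvShape (pvDiagXor a k p u) (n+2).toNat ∧
    pvMget (pvDiagXor a k p u) k k = pvB2i (vb != (pb != ub)) ∧
    (∀ x' y' : Int, 0 ≤ x' → 0 ≤ y' → (x' ≠ k ∨ y' ≠ k) → pvMget (pvDiagXor a k p u) x' y' = pvMget a x' y') := by
  exact pvCondXor a (n+2).toNat k k p u vb pb ub
    (if PySem.Int.mod p 2 = 1 then pvMset a k k (PySem.Int.bxor (pvMget a k k) 1) else a)
    (pvDiagXor a k p u) hs hk0 (by omega) hk0 (by omega) hv hp hu rfl rfl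

theorem pvOuter (n : Int) (grid : List String) (hn : 0 ≤ n) :
    ∀ (K : Nat), (K : Int) ≤ n →
    ∀ (a : List (List Int)) (ui uj : List Int) (ans : Int) (fr fc : PySem.Set Int),
    pvShape a (n+2).toNat →
    pvOrigOn grid a (K : Int) →
    pvFrRel n ui fr → pvFrRel n uj fc →
    ((PySem.List.pyRange (K : Int) 0 (-1)).foldl pvOuterStep (a, ui, uj, ans)).2.2.2
      = ((PySem.List.pyRange ((K : Int) - 1) (-1) (-1)).foldl (pvIterB grid) (ans, fr, fc)).1 := by
  intro K
  induction K with
  | zero =>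
    intro _ a ui uj ans fr fc _ _ _ _
    rw [show PySem.List.pyRange ((0:Nat):Int) 0 (-1) = [] from PySem.List.pyRange_neg_one_eq_nil (by omega),
        show PySem.List.pyRange (((0:Nat):Int) - 1) (-1) (-1) = [] from PySem.List.pyRange_neg_one_eq_nil (by omega)]
    rfl
  | succ K ih =>
    intro hKn a ui uj ans fr fc hs horig hfr hfc
    have hcast : ((K+1 : Nat) : Int) = (K : Int) + 1 := by push_cast; ring
    set k : Int := (K : Int) + 1 with hkdef
    have hk1 : 1 ≤ k := by omega
    have hkn : k ≤ n := by omega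
    rw [show PySem.List.pyRange ((K+1 : Nat) : Int) 0 (-1) = k :: PySem.List.pyRange (k-1) 0 (-1) from by
          rw [hcast, PySem.List.pyRange_neg_one_cons (by omega)],
        show PySem.List.pyRange (((K+1 : Nat) : Int) - 1) (-1) (-1)
            = (K : Int) :: PySem.List.pyRange ((K : Int) - 1) (-1) (-1) from by
          rw [hcast, show (K : Int) + 1 - 1 = (K : Int) from by ring,
              PySem.List.pyRange_neg_one_cons (by omega)],
        List.foldl_cons, List.foldl_cons]
    -- the head step of A
    set r := (PySem.List.pyRange 1 k 1).foldl (pvRowStep k) (a, ui, 0, ans) with hr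
    -- row pass
    obtain ⟨hsR, hansR, hpR, hfrR, holdR⟩ := pvRowPass n k grid hn hk1 hkn (k-1).toNat 1 (by omega) (by omega)
      a ui 0 ans 0 fr false hs (fun i hi1 hi2 => horig i k hi1 (by omega) (by omega) (by omega))
      hfr rfl r
      (((PySem.List.pyRange 0 (k-1) 1).map (fun i => (i, pvBit grid i (k-1)))).foldl pvSweepStep (0, fr, false))
      hr (by norm_num)
    set rB1 := ((PySem.List.pyRange 0 (k-1) 1).map (fun i => (i, pvBit grid i (k-1)))).foldl pvSweepStep (0, fr, false) with hrB1
    set rB2 := ((PySem.List.pyRange 0 (k-1) 1).map (fun j => (j, pvBit grid (k-1) j))).foldl pvSweepStep (0, fc, false) with hrB2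
    have hKk : (K : Int) = k - 1 := by omega
    -- diagonal after the row part
    set a3 := pvDiagXor r.1 k r.2.2.1 (pvVget r.2.1 k) with ha3
    have hvr : pvMget r.1 k k = pvB2i (pvBit grid (k-1) (k-1)) := by
      rw [holdR k k (by omega) (by omega) (Or.inr (Or.inr (le_refl k)))]
      exact horig k k (by omega) (by omega) (by omega) (by omega)
    obtain ⟨hs3, hv3, ho3⟩ := pvDiagXor_spec r.1 n k r.2.2.1 (pvVget r.2.1 k)
      (pvBit grid (k-1) (k-1)) rB1.2.2 (PySem.Set.contains rB1.2.1 (k-1))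
      hn hsR (by omega) (by omega) hvr hpR (hfrR.2 k hk1 hkn)
    rw [← ha3] at hs3 hv3 ho3
    set db := (pvBit grid (k-1) (k-1) != (rB1.2.2 != PySem.Set.contains rB1.2.1 (k-1))) with hdb
    -- column pass
    set r2 := (PySem.List.pyRange 1 k 1).foldl (pvColStep k) (a3, uj, 0, r.2.2.2) with hr2
    have horigC : ∀ j : Int, 1 ≤ j → j < k → pvMget a3 k j = pvOrig grid k j := by
      intro j hj1 hj2
      rw [ho3 k j (by omega) (by omega) (Or.inr (by omega)),
          holdR k j (by omega) (by omega) (Or.inl (by omega))]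
      exact horig k j (by omega) (by omega) hj1 (by omega)
    obtain ⟨hsC, hansC, hpC, hfcC, holdC⟩ := pvColPass n k grid hn hk1 hkn (k-1).toNat 1 (by omega) (by omega)
      a3 uj 0 (r.2.2.2) 0 fc false hs3 horigC hfc rfl r2 rB2 hr2 (by rw [hrB2]; norm_num)
    -- diagonal after the column part
    set a5 := pvDiagXor r2.1 k r2.2.2.1 (pvVget r2.2.1 k) with ha5
    have hvr2 : pvMget r2.1 k k = pvB2i db := by
      rw [holdC k k (by omega) (by omega) (Or.inr (Or.inr (le_refl k)))]
      exact hv3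
    obtain ⟨hs5, hv5, ho5⟩ := pvDiagXor_spec r2.1 n k r2.2.2.1 (pvVget r2.2.1 k)
      db rB2.2.2 (PySem.Set.contains rB2.2.1 (k-1))
      hn hsC (by omega) (by omega) hvr2 hpC (hfcC.2 k hk1 hkn)
    rw [← ha5] at hs5 hv5 ho5
    set eb := (db != (rB2.2.2 != PySem.Set.contains rB2.2.1 (k-1))) with heb
    -- the two head steps, as tuples
    have hstepA : pvOuterStep (a, ui, uj, ans) k =
        if pvMget a5 k k ≠ 0 then (pvMset a5 k k 0, r.2.1, r2.2.1, r2.2.2.2 + 1)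
        else (a5, r.2.1, r2.2.1, r2.2.2.2) := rfl
    have hstepB : pvIterB grid (ans, fr, fc) (K : Int) =
        ((if eb then ans + 1 else ans) + rB1.1 + rB2.1, rB1.2.1, rB2.2.1) := by
      rw [hKk]; rfl
    -- unchanged top-left (k-1)×(k-1) block
    have horig' : ∀ (az : List (List Int)), (az = pvMset a5 k k 0 ∨ az = a5) → pvOrigOn grid az ((K:Int)) := by
      intro az haz x y hx1 hx2 hy1 hy2
      have hxy : x ≤ k - 1 ∧ y ≤ k - 1 := by omega
      have h5 : pvMget az x y = pvMget a5 x y := by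
        rcases haz with h | h <;> rw [h]
        · exact pvMget_mset_ne a5 k k x y _ (by omega) (by omega) (by omega) (by omega) (Or.inl (by omega))
      rw [h5, ho5 x y (by omega) (by omega) (Or.inl (by omega)),
          holdC x y (by omega) (by omega) (Or.inl (by omega)),
          ho3 x y (by omega) (by omega) (Or.inl (by omega)),
          holdR x y (by omega) (by omega) (Or.inl (by omega))]
      exact horig x y hx1 (by omega) hy1 (by omega)
    have hshapes : ∀ (az : List (List Int)), (az = pvMset a5 k k 0 ∨ az = a5) → pvShape az (n+2).toNat := by
      intro az haz
      rcases haz with h | h <;> rw [h]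
      · exact pvShape_mset a5 _ k k _ hs5 (by omega) (by omega)
      · exact hs5
    rw [hstepA, hstepB]
    cases hebv : eb with
    | true =>
      rw [if_pos (by rw [hv5, hebv]; decide), if_pos rfl,
          show PySem.List.pyRange (k-1) 0 (-1) = PySem.List.pyRange ((K:Int)) 0 (-1) from by rw [hKk]]
      rw [ih (by omega) (pvMset a5 k k 0) r.2.1 r2.2.1 (r2.2.2.2 + 1) rB1.2.1 rB2.2.1
            (hshapes _ (Or.inl rfl)) (horig' _ (Or.inl rfl)) hfrR hfcC]
      have : r2.2.2.2 + 1 = ans + 1 + rB1.1 + rB2.1 := by omega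
      rw [this]
    | false =>
      rw [if_neg (by rw [hv5, hebv]; decide), if_neg Bool.false_ne_true,
          show PySem.List.pyRange (k-1) 0 (-1) = PySem.List.pyRange ((K:Int)) 0 (-1) from by rw [hKk]]
      rw [ih (by omega) a5 r.2.1 r2.2.1 r2.2.2.2 rB1.2.1 rB2.2.1
            (hshapes _ (Or.inr rfl)) (horig' _ (Or.inr rfl)) hfrR hfcC]
      have : r2.2.2.2 = ans + rB1.1 + rB2.1 := by omega
      rw [this]

theorem pvReplicate_shape (n : Int) :
    pvShape (List.replicate (n+2).toNat (List.replicate (n+2).toNat (0:Int))) (n+2).toNat :=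
  ⟨List.length_replicate, fun r hr => by rw [List.eq_of_mem_replicate hr]; exact List.length_replicate⟩

theorem pvFrRel_zero (n : Int) :
    pvFrRel n (List.replicate (n+2).toNat (0:Int)) PySem.Set.empty := by
  refine ⟨List.length_replicate, ?_⟩
  intro i hi1 hin
  rw [pvVget_eq _ _ (by omega)]
  have : (List.replicate (n+2).toNat (0:Int)).getD i.toNat 0 = 0 := by
    rcases Nat.lt_or_ge i.toNat (n+2).toNat with h | h
    · rw [List.getD_eq_getElem _ _ (by rw [List.length_replicate]; omega), List.getElem_replicate]
    · rw [List.getD_eq_default _ _ (by rw [List.length_replicate]; omega)]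
  rw [this]
  simp [PySem.Set.empty, pvB2i]

theorem pvInit_facts (n : Int) (grid : List String) (hn : 0 ≤ n)
    (hpre : Pre_calculate_min_commands n grid) :
    pvShape (pvInit n grid) (n+2).toNat ∧ pvOrigOn grid (pvInit n grid) ((n.toNat : Nat) : Int) := by
  have hinit : pvInit n grid = (PySem.List.pyRange 1 (n+1) 1).foldl (fun a i =>
      (PySem.List.pyRange 1 (n+1) 1).foldl (fun a j => pvMset a i j (pvIVal grid i j)) a)
      (List.replicate (n+2).toNat (List.replicate (n+2).toNat 0)) := rfl
  obtain ⟨hsh, hset, _⟩ := pvInitOuter n grid hn n.toNat 1 (by omega) (by omega)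
    (List.replicate (n+2).toNat (List.replicate (n+2).toNat 0)) (pvReplicate_shape n)
  rw [← hinit] at hsh hset
  refine ⟨hsh, ?_⟩
  intro x y hx1 hx2 hy1 hy2
  rw [hset x y (by omega) (by omega) (by omega) (by omega)]
  exact pvInitVal n grid hpre x y hx1 (by omega) hy1 (by omega)

-- ========== closed-form side: the XOR recurrences and the layer totals ==========

-- R[i][k]: parity of greedy commands at cells (i,k') with k' ≥ k (upper triangle)
def pvRspec (n : Int) (grid : List String) (i k : Int) : Bool :=
  if h : i ≤ 0 then false
  else (pvBgrid n grid i k ^^ pvBgrid n grid (i-1) k) ^^ pvRspec n grid (i-1) (k+1)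
termination_by i.toNat
decreasing_by omega

-- Q[i][j]: parity of greedy commands at cells (i',j) with i' ≥ i (lower triangle)
def pvQspec (n : Int) (grid : List String) (i j : Int) : Bool :=
  if h : j ≤ 0 then false
  else (pvBgrid n grid i j ^^ pvBgrid n grid i (j-1)) ^^ pvQspec n grid (i+1) (j-1)
termination_by j.toNat
decreasing_by omega

def pvCspec (n : Int) (grid : List String) (i k : Int) : Bool :=
  pvBgrid n grid i k ^^ pvRspec n grid i (k+1)

def pvPspec (n : Int) (grid : List String) (k j : Int) : Bool :=
  pvBgrid n grid k j ^^ pvQspec n grid (k+1) j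

def pvEspec (n : Int) (grid : List String) (K : Int) : Bool :=
  (((pvBgrid n grid K K ^^ pvCspec n grid (K-1) K) ^^ pvRspec n grid K (K+1))
    ^^ pvPspec n grid K (K-1)) ^^ pvQspec n grid (K+1) K

def pvRowCnt (n : Int) (grid : List String) (k m : Int) : Int :=
  if m ≤ 0 then 0
  else pvRowCnt n grid k (m-1) + (if pvRspec n grid m k ^^ pvRspec n grid m (k+1) then 1 else 0)
termination_by m.toNat
decreasing_by omega

def pvColCnt (n : Int) (grid : List String) (k m : Int) : Int :=
  if m ≤ 0 then 0
  else pvColCnt n grid k (m-1) + (if pvQspec n grid k m ^^ pvQspec n grid (k+1) m then 1 else 0)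
termination_by m.toNat
decreasing_by omega

def pvLayer (n : Int) (grid : List String) (K : Int) : Int :=
  pvRowCnt n grid K (K-1) + pvColCnt n grid K (K-1) + (if pvEspec n grid K then 1 else 0)

def pvTotal (n : Int) (grid : List String) (K : Int) : Int :=
  if K ≤ 0 then 0 else pvTotal n grid (K-1) + pvLayer n grid K
termination_by K.toNat
decreasing_by omega

theorem pvRspec_nonpos (n : Int) (grid : List String) (i k : Int) (h : i ≤ 0) :
    pvRspec n grid i k = false := by rw [pvRspec, dif_pos h]

theorem pvRspec_pos (n : Int) (grid : List String) (i k : Int) (h : 1 ≤ i) :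
    pvRspec n grid i k = ((pvBgrid n grid i k ^^ pvBgrid n grid (i-1) k) ^^ pvRspec n grid (i-1) (k+1)) := by
  rw [pvRspec, dif_neg (by omega : ¬ i ≤ 0)]

theorem pvQspec_nonpos (n : Int) (grid : List String) (i j : Int) (h : j ≤ 0) :
    pvQspec n grid i j = false := by rw [pvQspec, dif_pos h]

theorem pvQspec_pos (n : Int) (grid : List String) (i j : Int) (h : 1 ≤ j) :
    pvQspec n grid i j = ((pvBgrid n grid i j ^^ pvBgrid n grid i (j-1)) ^^ pvQspec n grid (i+1) (j-1)) := by
  rw [pvQspec, dif_neg (by omega : ¬ j ≤ 0)]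

theorem pvBgrid_oob (n : Int) (grid : List String) (i j : Int)
    (h : ¬(1 ≤ i ∧ i ≤ n ∧ 1 ≤ j ∧ j ≤ n)) : pvBgrid n grid i j = false := by
  have h' : ¬(1 ≤ i) ∨ ¬(i ≤ n) ∨ ¬(1 ≤ j) ∨ ¬(j ≤ n) := by tauto
  rcases h' with h' | h' | h' | h' <;> simp [pvBgrid, h']

-- in-bounds reads are the raw 0-based grid bit
theorem pvBgrid_in (n : Int) (grid : List String) (i j : Int)
    (h1 : 1 ≤ i) (h2 : i ≤ n) (h3 : 1 ≤ j) (h4 : j ≤ n) :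
    pvBgrid n grid i j = pvBit grid (i-1) (j-1) := by
  simp [pvBgrid, h1, h2, h3, h4]

theorem pvRspec_vanish_aux (n : Int) (grid : List String) :
    ∀ (m : Nat) (i k : Int), i ≤ (m : Int) → n < k → pvRspec n grid i k = false := by
  intro m
  induction m with
  | zero => intro i k hi hk; exact pvRspec_nonpos n grid i k (by omega)
  | succ m ih =>
    intro i k hi hk
    by_cases h0 : i ≤ 0
    · exact pvRspec_nonpos n grid i k h0
    · rw [pvRspec_pos n grid i k (by omega),
          pvBgrid_oob n grid i k (by omega), pvBgrid_oob n grid (i-1) k (by omega),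
          ih (i-1) (k+1) (by omega) (by omega)]
      rfl

theorem pvRspec_vanish (n : Int) (grid : List String) (i k : Int) (h : n < k) :
    pvRspec n grid i k = false := by
  by_cases h0 : i ≤ 0
  · exact pvRspec_nonpos n grid i k h0
  · exact pvRspec_vanish_aux n grid i.toNat i k (by omega) h

theorem pvQspec_vanish_aux (n : Int) (grid : List String) :
    ∀ (m : Nat) (i j : Int), j ≤ (m : Int) → n < i → pvQspec n grid i j = false := by
  intro m
  induction m with
  | zero => intro i j hj hi; exact pvQspec_nonpos n grid i j (by omega)
  | succ m ih =>
    intro i j hj hi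
    by_cases h0 : j ≤ 0
    · exact pvQspec_nonpos n grid i j h0
    · rw [pvQspec_pos n grid i j (by omega),
          pvBgrid_oob n grid i j (by omega), pvBgrid_oob n grid i (j-1) (by omega),
          ih (i+1) (j-1) (by omega) (by omega)]
      rfl

theorem pvQspec_vanish (n : Int) (grid : List String) (i j : Int) (h : n < i) :
    pvQspec n grid i j = false := by
  by_cases h0 : j ≤ 0
  · exact pvQspec_nonpos n grid i j h0
  · exact pvQspec_vanish_aux n grid j.toNat i j (by omega) h

theorem pvRowCnt_nonpos (n : Int) (grid : List String) (k m : Int) (h : m ≤ 0) :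
    pvRowCnt n grid k m = 0 := by rw [pvRowCnt, if_pos h]

theorem pvRowCnt_pos (n : Int) (grid : List String) (k m : Int) (h : 1 ≤ m) :
    pvRowCnt n grid k m = pvRowCnt n grid k (m-1) + (if pvRspec n grid m k ^^ pvRspec n grid m (k+1) then 1 else 0) := by
  rw [pvRowCnt, if_neg (by omega)]

theorem pvColCnt_nonpos (n : Int) (grid : List String) (k m : Int) (h : m ≤ 0) :
    pvColCnt n grid k m = 0 := by rw [pvColCnt, if_pos h]

theorem pvColCnt_pos (n : Int) (grid : List String) (k m : Int) (h : 1 ≤ m) :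
    pvColCnt n grid k m = pvColCnt n grid k (m-1) + (if pvQspec n grid k m ^^ pvQspec n grid (k+1) m then 1 else 0) := by
  rw [pvColCnt, if_neg (by omega)]

theorem pvTotal_nonpos (n : Int) (grid : List String) (K : Int) (h : K ≤ 0) :
    pvTotal n grid K = 0 := by rw [pvTotal, if_pos h]

theorem pvTotal_pos (n : Int) (grid : List String) (K : Int) (h : 1 ≤ K) :
    pvTotal n grid K = pvTotal n grid (K-1) + pvLayer n grid K := by
  rw [pvTotal, if_neg (by omega)]

theorem pvBneXor (a b : Bool) : (a != b) = (a ^^ b) := by cases a <;> cases b <;> rfl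

theorem pvXorTrig (a b c d : Bool) : (a ^^ ((b ^^ c) ^^ d)) = (((a ^^ b) ^^ c) ^^ d) := by
  cases a <;> cases b <;> cases c <;> cases d <;> rfl

theorem pvXorC (a b c d : Bool) : (a ^^ d) = ((b ^^ c) ^^ ((((a ^^ b) ^^ c) ^^ d))) := by
  cases a <;> cases b <;> cases c <;> cases d <;> rfl

theorem pvXorE (x y z u v : Bool) :
    ((x ^^ (y ^^ z)) ^^ (u ^^ v)) = ((((x ^^ y) ^^ z) ^^ u) ^^ v) := by
  cases x <;> cases y <;> cases z <;> cases u <;> cases v <;> rfl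

theorem pvCspec_zero (n : Int) (grid : List String) (k : Int) : pvCspec n grid 0 k = false := by
  rw [pvCspec, pvBgrid_oob n grid 0 k (by omega), pvRspec_nonpos n grid 0 (k+1) (by omega)]
  rfl

theorem pvPspec_zero (n : Int) (grid : List String) (k : Int) : pvPspec n grid k 0 = false := by
  rw [pvPspec, pvBgrid_oob n grid k 0 (by omega), pvQspec_nonpos n grid (k+1) 0 (by omega)]
  rfl

-- the sweep over the cells of column K (rows i0..K-1), against the closed form
theorem pvSweepU (n K : Int) (grid : List String) (hK1 : 1 ≤ K) (hKn : K ≤ n) :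
    ∀ (m : Nat) (i0 : Int), 1 ≤ i0 → i0 + m = K →
    ∀ (cnt : Int) (fl : PySem.Set Int),
    (∀ r : Int, i0 ≤ r → r ≤ K → PySem.Set.contains fl (r-1) = pvRspec n grid r (K+1)) →
    ∀ res, res = ((PySem.List.pyRange (i0-1) (K-1) 1).map (fun i => (i, pvBit grid i (K-1)))).foldl
        pvSweepStep (cnt, fl, pvCspec n grid (i0-1) K) →
    res.1 = cnt + (pvRowCnt n grid K (K-1) - pvRowCnt n grid K (i0-1)) ∧
    res.2.2 = pvCspec n grid (K-1) K ∧
    (∀ x : Int, PySem.Set.contains res.2.1 x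
      = if i0-1 ≤ x ∧ x ≤ K-2 then pvRspec n grid (x+1) K else PySem.Set.contains fl x) := by
  intro m
  induction m with
  | zero =>
    intro i0 h1 h2 cnt fl hinv res hres
    rw [show PySem.List.pyRange (i0-1) (K-1) 1 = [] from PySem.List.pyRange_one_eq_nil (by omega)] at hres
    simp only [List.map_nil, List.foldl_nil] at hres
    subst hres
    refine ⟨by rw [show i0 - 1 = K - 1 from by omega]; omega, by rw [show i0 - 1 = K - 1 from by omega], ?_⟩
    intro x
    rw [if_neg (by omega)]
  | succ m ih =>
    intro i0 h1 h2 cnt fl hinv res hres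
    rw [show PySem.List.pyRange (i0-1) (K-1) 1 = (i0-1) :: PySem.List.pyRange i0 (K-1) 1 from by
          rw [PySem.List.pyRange_one_cons (by omega), sub_add_cancel],
        List.map_cons, List.foldl_cons] at hres
    -- the head cell, row i0 of column K
    have hbit : pvBit grid (i0-1) (K-1) = pvBgrid n grid i0 K := by
      rw [pvBgrid_in n grid i0 K (by omega) (by omega) (by omega) (by omega)]
    have hmem : PySem.Set.contains fl (i0-1) = pvRspec n grid i0 (K+1) := by
      have := hinv i0 (le_refl i0) (by omega)
      exact this
    -- the trigger is the closed-form command bit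
    have htrig : (pvBit grid (i0-1) (K-1) != (pvCspec n grid (i0-1) K != PySem.Set.contains fl (i0-1)))
        = (pvRspec n grid i0 K ^^ pvRspec n grid i0 (K+1)) := by
      rw [hbit, hmem, pvBneXor, pvBneXor, pvCspec,
          pvRspec_pos n grid i0 K (by omega)]
      exact pvXorTrig _ _ _ _
    have hstep : pvSweepStep (cnt, fl, pvCspec n grid (i0-1) K) (i0-1, pvBit grid (i0-1) (K-1))
        = if (pvRspec n grid i0 K ^^ pvRspec n grid i0 (K+1))
          then (cnt + 1, PySem.Set.symmDiff fl [i0-1], !(pvCspec n grid (i0-1) K))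
          else (cnt, fl, pvCspec n grid (i0-1) K) := by
      rw [pvSweepStep]
      simp only [htrig]
    have hCstep : pvCspec n grid i0 K
        = (pvCspec n grid (i0-1) K ^^ (pvRspec n grid i0 K ^^ pvRspec n grid i0 (K+1))) := by
      rw [pvCspec, pvCspec, pvRspec_pos n grid i0 K (by omega)]
      exact pvXorC _ _ _ _
    have hRown : pvRowCnt n grid K i0 = pvRowCnt n grid K (i0-1)
        + (if pvRspec n grid i0 K ^^ pvRspec n grid i0 (K+1) then 1 else 0) :=
      pvRowCnt_pos n grid K i0 (by omega)
    cases hcc : (pvRspec n grid i0 K ^^ pvRspec n grid i0 (K+1)) with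
    | true =>
      rw [hstep, if_pos (by rw [hcc])] at hres
      have hp' : (!(pvCspec n grid (i0-1) K)) = pvCspec n grid i0 K := by
        rw [hCstep, hcc, Bool.xor_true]
      rw [hp'] at hres
      have hinv' : ∀ r : Int, i0+1 ≤ r → r ≤ K →
          PySem.Set.contains (PySem.Set.symmDiff fl [i0-1]) (r-1) = pvRspec n grid r (K+1) := by
        intro r hr1 hr2
        rw [pvContains_symmDiff_single, if_neg (by omega)]
        exact hinv r (by omega) hr2
      obtain ⟨c1, c2, c3⟩ := ih (i0+1) (by omega) (by omega) (cnt+1)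
        (PySem.Set.symmDiff fl [i0-1]) hinv' res (by rw [show i0 + 1 - 1 = i0 from by ring]; exact hres)
      have hRown' : pvRowCnt n grid K i0 = pvRowCnt n grid K (i0-1) + 1 := by
        rw [hRown, hcc]; norm_num
      refine ⟨?_, c2, ?_⟩
      · rw [c1, show (i0:Int) + 1 - 1 = i0 from by ring]; omega
      intro x
      rw [c3 x]
      by_cases hx : i0+1-1 ≤ x ∧ x ≤ K-2
      · rw [if_pos hx, if_pos (by omega)]
      · rw [if_neg hx, pvContains_symmDiff_single]
        by_cases hx2 : x = i0-1
        · rw [if_pos hx2, if_pos (by omega), hx2, hmem,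
              show i0 - 1 + 1 = i0 from by ring]
          cases h5 : pvRspec n grid i0 K <;> cases h6 : pvRspec n grid i0 (K+1) <;>
            rw [h5, h6] at hcc <;> first | rfl | exact absurd hcc (by decide)
        · rw [if_neg hx2, if_neg (by omega)]
    | false =>
      rw [hstep, if_neg (by rw [hcc]; exact Bool.false_ne_true)] at hres
      have hp' : pvCspec n grid (i0-1) K = pvCspec n grid i0 K := by
        rw [hCstep, hcc, Bool.xor_false]
      rw [hp'] at hres
      obtain ⟨c1, c2, c3⟩ := ih (i0+1) (by omega) (by omega) cnt fl
        (fun r hr1 hr2 => hinv r (by omega) hr2) res (by rw [show i0 + 1 - 1 = i0 from by ring]; exact hres)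
      have hRown' : pvRowCnt n grid K i0 = pvRowCnt n grid K (i0-1) := by
        rw [hRown, hcc]; norm_num
      refine ⟨?_, c2, ?_⟩
      · rw [c1, show (i0:Int) + 1 - 1 = i0 from by ring]; omega
      intro x
      rw [c3 x]
      by_cases hx : i0+1-1 ≤ x ∧ x ≤ K-2
      · rw [if_pos hx, if_pos (by omega)]
      · by_cases hx2 : x = i0-1
        · rw [if_neg hx, if_pos (by omega), hx2, hmem,
              show i0 - 1 + 1 = i0 from by ring]
          cases h5 : pvRspec n grid i0 K <;> cases h6 : pvRspec n grid i0 (K+1) <;>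
            rw [h5, h6] at hcc <;> first | rfl | exact absurd hcc (by decide)
        · rw [if_neg hx, if_neg (by omega)]

-- the sweep over the cells of row K (columns j0..K-1), against the closed form
theorem pvSweepL (n K : Int) (grid : List String) (hK1 : 1 ≤ K) (hKn : K ≤ n) :
    ∀ (m : Nat) (j0 : Int), 1 ≤ j0 → j0 + m = K →
    ∀ (cnt : Int) (fl : PySem.Set Int),
    (∀ c : Int, j0 ≤ c → c ≤ K → PySem.Set.contains fl (c-1) = pvQspec n grid (K+1) c) →
    ∀ res, res = ((PySem.List.pyRange (j0-1) (K-1) 1).map (fun j => (j, pvBit grid (K-1) j))).foldl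
        pvSweepStep (cnt, fl, pvPspec n grid K (j0-1)) →
    res.1 = cnt + (pvColCnt n grid K (K-1) - pvColCnt n grid K (j0-1)) ∧
    res.2.2 = pvPspec n grid K (K-1) ∧
    (∀ x : Int, PySem.Set.contains res.2.1 x
      = if j0-1 ≤ x ∧ x ≤ K-2 then pvQspec n grid K (x+1) else PySem.Set.contains fl x) := by
  intro m
  induction m with
  | zero =>
    intro j0 h1 h2 cnt fl hinv res hres
    rw [show PySem.List.pyRange (j0-1) (K-1) 1 = [] from PySem.List.pyRange_one_eq_nil (by omega)] at hres
    simp only [List.map_nil, List.foldl_nil] at hres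
    subst hres
    refine ⟨by rw [show j0 - 1 = K - 1 from by omega]; omega, by rw [show j0 - 1 = K - 1 from by omega], ?_⟩
    intro x
    rw [if_neg (by omega)]
  | succ m ih =>
    intro j0 h1 h2 cnt fl hinv res hres
    rw [show PySem.List.pyRange (j0-1) (K-1) 1 = (j0-1) :: PySem.List.pyRange j0 (K-1) 1 from by
          rw [PySem.List.pyRange_one_cons (by omega), sub_add_cancel],
        List.map_cons, List.foldl_cons] at hres
    have hbit : pvBit grid (K-1) (j0-1) = pvBgrid n grid K j0 := by
      rw [pvBgrid_in n grid K j0 (by omega) (by omega) (by omega) (by omega)]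
    have hmem : PySem.Set.contains fl (j0-1) = pvQspec n grid (K+1) j0 := by
      have := hinv j0 (le_refl j0) (by omega)
      exact this
    have htrig : (pvBit grid (K-1) (j0-1) != (pvPspec n grid K (j0-1) != PySem.Set.contains fl (j0-1)))
        = (pvQspec n grid K j0 ^^ pvQspec n grid (K+1) j0) := by
      rw [hbit, hmem, pvBneXor, pvBneXor, pvPspec,
          pvQspec_pos n grid K j0 (by omega)]
      exact pvXorTrig _ _ _ _
    have hstep : pvSweepStep (cnt, fl, pvPspec n grid K (j0-1)) (j0-1, pvBit grid (K-1) (j0-1))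
        = if (pvQspec n grid K j0 ^^ pvQspec n grid (K+1) j0)
          then (cnt + 1, PySem.Set.symmDiff fl [j0-1], !(pvPspec n grid K (j0-1)))
          else (cnt, fl, pvPspec n grid K (j0-1)) := by
      rw [pvSweepStep]
      simp only [htrig]
    have hPstep : pvPspec n grid K j0
        = (pvPspec n grid K (j0-1) ^^ (pvQspec n grid K j0 ^^ pvQspec n grid (K+1) j0)) := by
      rw [pvPspec, pvPspec, pvQspec_pos n grid K j0 (by omega)]
      exact pvXorC _ _ _ _
    have hColn : pvColCnt n grid K j0 = pvColCnt n grid K (j0-1)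
        + (if pvQspec n grid K j0 ^^ pvQspec n grid (K+1) j0 then 1 else 0) :=
      pvColCnt_pos n grid K j0 (by omega)
    cases hcc : (pvQspec n grid K j0 ^^ pvQspec n grid (K+1) j0) with
    | true =>
      rw [hstep, if_pos (by rw [hcc])] at hres
      have hp' : (!(pvPspec n grid K (j0-1))) = pvPspec n grid K j0 := by
        rw [hPstep, hcc, Bool.xor_true]
      rw [hp'] at hres
      have hinv' : ∀ c : Int, j0+1 ≤ c → c ≤ K →
          PySem.Set.contains (PySem.Set.symmDiff fl [j0-1]) (c-1) = pvQspec n grid (K+1) c := by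
        intro c hc1 hc2
        rw [pvContains_symmDiff_single, if_neg (by omega)]
        exact hinv c (by omega) hc2
      obtain ⟨c1, c2, c3⟩ := ih (j0+1) (by omega) (by omega) (cnt+1)
        (PySem.Set.symmDiff fl [j0-1]) hinv' res (by rw [show j0 + 1 - 1 = j0 from by ring]; exact hres)
      have hColn' : pvColCnt n grid K j0 = pvColCnt n grid K (j0-1) + 1 := by
        rw [hColn, hcc]; norm_num
      refine ⟨?_, c2, ?_⟩
      · rw [c1, show (j0:Int) + 1 - 1 = j0 from by ring]; omega
      intro x
      rw [c3 x]
      by_cases hx : j0+1-1 ≤ x ∧ x ≤ K-2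
      · rw [if_pos hx, if_pos (by omega)]
      · rw [if_neg hx, pvContains_symmDiff_single]
        by_cases hx2 : x = j0-1
        · rw [if_pos hx2, if_pos (by omega), hx2, hmem,
              show j0 - 1 + 1 = j0 from by ring]
          cases h5 : pvQspec n grid K j0 <;> cases h6 : pvQspec n grid (K+1) j0 <;>
            rw [h5, h6] at hcc <;> first | rfl | exact absurd hcc (by decide)
        · rw [if_neg hx2, if_neg (by omega)]
    | false =>
      rw [hstep, if_neg (by rw [hcc]; exact Bool.false_ne_true)] at hres
      have hp' : pvPspec n grid K (j0-1) = pvPspec n grid K j0 := by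
        rw [hPstep, hcc, Bool.xor_false]
      rw [hp'] at hres
      obtain ⟨c1, c2, c3⟩ := ih (j0+1) (by omega) (by omega) cnt fl
        (fun c hc1 hc2 => hinv c (by omega) hc2) res (by rw [show j0 + 1 - 1 = j0 from by ring]; exact hres)
      have hColn' : pvColCnt n grid K j0 = pvColCnt n grid K (j0-1) := by
        rw [hColn, hcc]; norm_num
      refine ⟨?_, c2, ?_⟩
      · rw [c1, show (j0:Int) + 1 - 1 = j0 from by ring]; omega
      intro x
      rw [c3 x]
      by_cases hx : j0+1-1 ≤ x ∧ x ≤ K-2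
      · rw [if_pos hx, if_pos (by omega)]
      · by_cases hx2 : x = j0-1
        · rw [if_neg hx, if_pos (by omega), hx2, hmem,
              show j0 - 1 + 1 = j0 from by ring]
          cases h5 : pvQspec n grid K j0 <;> cases h6 : pvQspec n grid (K+1) j0 <;>
            rw [h5, h6] at hcc <;> first | rfl | exact absurd hcc (by decide)
        · rw [if_neg hx, if_neg (by omega)]

-- the descending sweep iteration totals the closed-form layers
theorem pvIterTotal (n : Int) (grid : List String) :
    ∀ (K : Nat), (K : Int) ≤ n →
    ∀ (ans : Int) (fr fc : PySem.Set Int),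
    (∀ r : Int, 1 ≤ r → r ≤ (K : Int) → PySem.Set.contains fr (r-1) = pvRspec n grid r ((K:Int)+1)) →
    (∀ c : Int, 1 ≤ c → c ≤ (K : Int) → PySem.Set.contains fc (c-1) = pvQspec n grid ((K:Int)+1) c) →
    ((PySem.List.pyRange ((K : Int) - 1) (-1) (-1)).foldl (pvIterB grid) (ans, fr, fc)).1
      = ans + pvTotal n grid (K : Int) := by
  intro K
  induction K with
  | zero =>
    intro _ ans fr fc _ _
    rw [show PySem.List.pyRange (((0:Nat):Int) - 1) (-1) (-1) = [] from PySem.List.pyRange_neg_one_eq_nil (by omega)]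
    rw [pvTotal_nonpos n grid _ (by omega)]
    simp
  | succ K ih =>
    intro hKn ans fr fc hfr hfc
    have hcast : ((K+1 : Nat) : Int) = (K : Int) + 1 := by push_cast; ring
    set k : Int := (K : Int) + 1 with hkdef
    have hk1 : 1 ≤ k := by omega
    have hkn : k ≤ n := by omega
    rw [show PySem.List.pyRange (((K+1 : Nat) : Int) - 1) (-1) (-1)
          = (k-1) :: PySem.List.pyRange ((K : Int) - 1) (-1) (-1) from by
        rw [hcast, show (K : Int) + 1 - 1 = k - 1 from by omega]
        rw [PySem.List.pyRange_neg_one_cons (by omega)]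
        rw [show k - 1 - 1 = (K : Int) - 1 from by omega],
      List.foldl_cons]
    -- the row sweep of layer k
    have hr1 := pvSweepU n k grid hk1 hkn (k-1).toNat 1 (by omega) (by omega) 0 fr
      (by intro r hr1 hr2; exact hfr r hr1 (by omega))
      (pvSweep ((PySem.List.pyRange 0 (k-1) 1).map (fun i => (i, pvBit grid i (k-1)))) fr)
      (by rw [pvSweep, show (1:Int)-1 = 0 from by ring, pvCspec_zero])
    obtain ⟨hr1c, hr1p, hr1f⟩ := hr1
    set r1 := pvSweep ((PySem.List.pyRange 0 (k-1) 1).map (fun i => (i, pvBit grid i (k-1)))) fr with hr1def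
    -- the column sweep of layer k
    have hr2 := pvSweepL n k grid hk1 hkn (k-1).toNat 1 (by omega) (by omega) 0 fc
      (by intro c hc1 hc2; exact hfc c hc1 (by omega))
      (pvSweep ((PySem.List.pyRange 0 (k-1) 1).map (fun j => (j, pvBit grid (k-1) j))) fc)
      (by rw [pvSweep, show (1:Int)-1 = 0 from by ring, pvPspec_zero])
    obtain ⟨hr2c, hr2p, hr2f⟩ := hr2
    set r2 := pvSweep ((PySem.List.pyRange 0 (k-1) 1).map (fun j => (j, pvBit grid (k-1) j))) fc with hr2def
    -- the diagonal decision of layer k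
    have hdiagbit : pvBit grid (k-1) (k-1) = pvBgrid n grid k k :=
      (pvBgrid_in n grid k k (by omega) (by omega) (by omega) (by omega)).symm
    have hfl1 : PySem.Set.contains r1.2.1 (k-1) = pvRspec n grid k (k+1) := by
      rw [hr1f (k-1), if_neg (by omega)]
      exact hfr k (by omega) (by omega)
    have hfl2 : PySem.Set.contains r2.2.1 (k-1) = pvQspec n grid (k+1) k := by
      rw [hr2f (k-1), if_neg (by omega)]
      exact hfc k (by omega) (by omega)
    have hd : ((pvBit grid (k-1) (k-1) != (r1.2.2 != PySem.Set.contains r1.2.1 (k-1)))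
          != (r2.2.2 != PySem.Set.contains r2.2.1 (k-1))) = pvEspec n grid k := by
      rw [hdiagbit, hr1p, hfl1, hr2p, hfl2, pvBneXor, pvBneXor, pvBneXor, pvBneXor, pvEspec]
      exact pvXorE _ _ _ _ _
    -- one step of the iteration
    have hstep : pvIterB grid (ans, fr, fc) (k-1)
        = ((if pvEspec n grid k then ans + 1 else ans) + r1.1 + r2.1, r1.2.1, r2.2.1) := by
      rw [pvIterB]
      simp only [← hr1def, ← hr2def, hd]
    rw [hstep]
    -- the invariants for the next layer
    have hfr' : ∀ r : Int, 1 ≤ r → r ≤ (K : Int) →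
        PySem.Set.contains r1.2.1 (r-1) = pvRspec n grid r ((K:Int)+1) := by
      intro r h1 h2
      rw [hr1f (r-1), if_pos (by omega), show r - 1 + 1 = r from by ring, hkdef]
    have hfc' : ∀ c : Int, 1 ≤ c → c ≤ (K : Int) →
        PySem.Set.contains r2.2.1 (c-1) = pvQspec n grid ((K:Int)+1) c := by
      intro c h1 h2
      rw [hr2f (c-1), if_pos (by omega), show c - 1 + 1 = c from by ring, hkdef]
    rw [ih (by omega) _ r1.2.1 r2.2.1 hfr' hfc']
    rw [hcast, pvTotal_pos n grid k (by omega)]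
    rw [hr1c, hr2c, pvRowCnt_nonpos n grid k (1-1) (by omega), pvColCnt_nonpos n grid k (1-1) (by omega)]
    rw [pvLayer, show k - 1 = (K : Int) from by omega]
    by_cases he : pvEspec n grid k
    · rw [if_pos he, if_pos he]; omega
    · rw [if_neg he, if_neg he]; omega

-- ========== B's port computes the closed form ==========

-- ----- Bool matrix helpers (clones of the Int ones used for A's matrix) -----

def pvBShape (a : List (List Bool)) (m : Nat) : Prop :=
  a.length = m ∧ ∀ r ∈ a, r.length = m

theorem pvBRow_eq (a : List (List Bool)) (i : Int) (h0 : 0 ≤ i) :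
    (PySem.List.pyGet? a i).getD [] = a.getD i.toNat [] := by
  rw [PySem.List.pyGet?_of_nonneg _ h0]
  rcases h : a[i.toNat]? with _ | r <;> simp_all [List.getD]

theorem pvBRow_len (a : List (List Bool)) (m : Nat) (i : Int) (hs : pvBShape a m)
    (h0 : 0 ≤ i) (hm : i < (m : Int)) :
    ((PySem.List.pyGet? a i).getD []).length = m := by
  rw [pvBRow_eq a i h0]
  have hl1 := hs.1
  have hlen : i.toNat < a.length := by omega
  rw [List.getD_eq_getElem a [] hlen]
  exact hs.2 _ (List.getElem_mem hlen)

theorem pvBShape_set (a : List (List Bool)) (m : Nat) (i j : Int) (v : Bool) (hs : pvBShape a m)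
    (h0 : 0 ≤ i) (hm : i < (m : Int)) :
    pvBShape (pvBset a i j v) m := by
  obtain ⟨h1, h2⟩ := hs
  refine ⟨by simpa [pvBset] using h1, ?_⟩
  intro r hr
  rcases List.mem_or_eq_of_mem_set hr with h | h
  · exact h2 r h
  · subst h
    rw [List.length_set]
    exact pvBRow_len a m i ⟨h1, h2⟩ h0 hm

theorem pvBget_eq (a : List (List Bool)) (i j : Int) (h0 : 0 ≤ i) (hj : 0 ≤ j) :
    pvBget a i j = (a.getD i.toNat []).getD j.toNat false := by
  unfold pvBget
  rw [pvBRow_eq a i h0, PySem.List.pyGet?_of_nonneg _ hj]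
  rcases h : (a.getD i.toNat [])[j.toNat]? with _ | r <;> simp_all [List.getD]

theorem pvBget_set_self (a : List (List Bool)) (m : Nat) (i j : Int) (v : Bool) (hs : pvBShape a m)
    (hi0 : 0 ≤ i) (him : i < (m : Int)) (hj0 : 0 ≤ j) (hjm : j < (m : Int)) :
    pvBget (pvBset a i j v) i j = v := by
  have hl1 := hs.1
  have hlen : i.toNat < a.length := by omega
  have hrl : ((PySem.List.pyGet? a i).getD []).length = m := pvBRow_len a m i hs hi0 him
  rw [pvBget_eq _ _ _ hi0 hj0]
  unfold pvBset
  rw [List.getD_eq_getElem _ [] (by rw [List.length_set]; omega)]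
  rw [List.getElem_set_self]
  rw [List.getD_eq_getElem _ false (by rw [List.length_set]; omega)]
  rw [List.getElem_set_self]

theorem pvBget_set_ne (a : List (List Bool)) (i j x y : Int) (v : Bool)
    (hi0 : 0 ≤ i) (hj0 : 0 ≤ j) (hx0 : 0 ≤ x) (hy0 : 0 ≤ y)
    (hne : x ≠ i ∨ y ≠ j) :
    pvBget (pvBset a i j v) x y = pvBget a x y := by
  rw [pvBget_eq _ _ _ hx0 hy0, pvBget_eq _ _ _ hx0 hy0]
  unfold pvBset
  by_cases hxi : x = i
  · subst hxi
    have hyj : y ≠ j := by tauto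
    have hyj' : y.toNat ≠ j.toNat := by omega
    by_cases hlen : x.toNat < a.length
    · rw [List.getD_eq_getElem _ [] (by rw [List.length_set]; omega),
          List.getElem_set_self, pvBRow_eq a x hx0,
          List.getD_eq_getElem a [] hlen]
      by_cases hj2 : y.toNat < (a[x.toNat].set j.toNat v).length
      · rw [List.getD_eq_getElem _ false hj2, List.getElem_set_ne (by omega),
            List.getD_eq_getElem _ false (by rw [List.length_set] at hj2; omega)]
      · rw [List.length_set] at hj2
        rw [List.getD_eq_default _ false (by rw [List.length_set]; omega),
            List.getD_eq_default _ false (by omega)]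
    · rw [List.set_eq_of_length_le (by omega)]
  · have : x.toNat ≠ i.toNat ∨ a.length ≤ i.toNat := by omega
    rcases this with h | h
    · have hrow : (a.set i.toNat (((PySem.List.pyGet? a i).getD []).set j.toNat v)).getD x.toNat []
          = a.getD x.toNat [] := by
        rw [List.getD_eq_getElem?_getD, List.getElem?_set_ne (by omega), ← List.getD_eq_getElem?_getD]
      rw [hrow]
    · rw [List.set_eq_of_length_le (by omega)]

theorem pvBShape_replicate (m : Nat) :
    pvBShape (List.replicate m (List.replicate m false)) m :=
  ⟨List.length_replicate, fun r hr => by rw [List.eq_of_mem_replicate hr]; exact List.length_replicate⟩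

theorem pvBget_replicate (m : Nat) (i j : Int) (h1 : 0 ≤ i) (h2 : 0 ≤ j) :
    pvBget (List.replicate m (List.replicate m false)) i j = false := by
  rw [pvBget_eq _ _ _ h1 h2]
  have houter : (List.replicate m (List.replicate m false)).getD i.toNat [] = List.replicate m false
      ∨ (List.replicate m (List.replicate m false)).getD i.toNat [] = ([] : List Bool) := by
    rcases Nat.lt_or_ge i.toNat m with h | h
    · left
      rw [List.getD_eq_getElem _ _ (by rw [List.length_replicate]; omega), List.getElem_replicate]
    · right
      rw [List.getD_eq_default _ _ (by rw [List.length_replicate]; omega)]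
  rcases houter with h | h <;> rw [h]
  · rcases Nat.lt_or_ge j.toNat m with h' | h'
    · rw [List.getD_eq_getElem _ _ (by rw [List.length_replicate]; omega), List.getElem_replicate]
    · rw [List.getD_eq_default _ _ (by rw [List.length_replicate]; omega)]
  · rw [List.getD_nil]

-- ----- R matrix build -----

theorem pvRmatInner (n : Int) (grid : List String) (hn : 0 ≤ n) (i0 : Int)
    (h1 : 1 ≤ i0) (h2 : i0 ≤ n) :
    ∀ (m : Nat) (k0 : Int), 1 ≤ k0 → k0 + m = n + 1 → ∀ a, pvBShape a (n+2).toNat →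
    (∀ x y : Int, 0 ≤ x → 0 ≤ y → pvBget a x y =
      (if (1 ≤ x ∧ x < i0 ∧ 1 ≤ y ∧ y ≤ n) ∨ (x = i0 ∧ 1 ≤ y ∧ y < k0) then pvRspec n grid x y else false)) →
    pvBShape ((PySem.List.pyRange k0 (n+1) 1).foldl (fun a k =>
      pvBset a i0 k ((pvBgrid n grid i0 k ^^ pvBgrid n grid (i0-1) k) ^^ pvBget a (i0-1) (k+1))) a) (n+2).toNat ∧
    (∀ x y : Int, 0 ≤ x → 0 ≤ y →
      pvBget ((PySem.List.pyRange k0 (n+1) 1).foldl (fun a k =>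
        pvBset a i0 k ((pvBgrid n grid i0 k ^^ pvBgrid n grid (i0-1) k) ^^ pvBget a (i0-1) (k+1))) a) x y =
      (if (1 ≤ x ∧ x < i0 ∧ 1 ≤ y ∧ y ≤ n) ∨ (x = i0 ∧ 1 ≤ y ∧ y < n+1) then pvRspec n grid x y else false)) := by
  intro m
  induction m with
  | zero =>
    intro k0 hk1 hk2 a hs hinv
    rw [show PySem.List.pyRange k0 (n+1) 1 = [] from PySem.List.pyRange_one_eq_nil (by omega)]
    simp only [List.foldl_nil]
    exact ⟨hs, by intro x y hx hy; rw [hinv x y hx hy, show k0 = n+1 from by omega]⟩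
  | succ m ih =>
    intro k0 hk1 hk2 a hs hinv
    rw [show PySem.List.pyRange k0 (n+1) 1 = k0 :: PySem.List.pyRange (k0+1) (n+1) 1 from
          PySem.List.pyRange_one_cons (by omega), List.foldl_cons]
    have hm2 : ((n+2).toNat : Int) = n + 2 := by omega
    -- the value read is the closed form (padding rows/columns vanish)
    have hval : pvBget a (i0-1) (k0+1) = pvRspec n grid (i0-1) (k0+1) := by
      rw [hinv (i0-1) (k0+1) (by omega) (by omega)]
      by_cases ha : 1 ≤ i0 - 1
      · by_cases hb : k0 + 1 ≤ n
        · rw [if_pos (Or.inl ⟨ha, by omega, by omega, hb⟩)]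
        · rw [if_neg (by omega), pvRspec_vanish n grid _ _ (by omega)]
      · rw [if_neg (by omega), pvRspec_nonpos n grid _ _ (by omega)]
    have hwrite : ((pvBgrid n grid i0 k0 ^^ pvBgrid n grid (i0-1) k0) ^^ pvBget a (i0-1) (k0+1))
        = pvRspec n grid i0 k0 := by
      rw [hval, ← pvRspec_pos n grid i0 k0 (by omega)]
    rw [hwrite]
    have hs' : pvBShape (pvBset a i0 k0 (pvRspec n grid i0 k0)) (n+2).toNat :=
      pvBShape_set a _ i0 k0 _ hs (by omega) (by omega)
    have hinv' : ∀ x y : Int, 0 ≤ x → 0 ≤ y →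
        pvBget (pvBset a i0 k0 (pvRspec n grid i0 k0)) x y =
        (if (1 ≤ x ∧ x < i0 ∧ 1 ≤ y ∧ y ≤ n) ∨ (x = i0 ∧ 1 ≤ y ∧ y < k0+1) then pvRspec n grid x y else false) := by
      intro x y hx hy
      by_cases hxy : x = i0 ∧ y = k0
      · rw [hxy.1, hxy.2,
            pvBget_set_self a _ i0 k0 _ hs (by omega) (by omega) (by omega) (by omega),
            if_pos (Or.inr ⟨rfl, by omega, by omega⟩)]
      · have hne : x ≠ i0 ∨ y ≠ k0 := by tauto
        rw [pvBget_set_ne a i0 k0 x y _ (by omega) (by omega) hx hy hne, hinv x y hx hy]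
        by_cases hc : (1 ≤ x ∧ x < i0 ∧ 1 ≤ y ∧ y ≤ n) ∨ (x = i0 ∧ 1 ≤ y ∧ y < k0)
        · rw [if_pos hc, if_pos (by rcases hc with h | h; exact Or.inl h; exact Or.inr ⟨h.1, h.2.1, by omega⟩)]
        · rw [if_neg hc, if_neg (by
            intro hc'
            rcases hc' with h | h
            · exact hc (Or.inl h)
            · rcases hne with hne | hne
              · exact hne h.1
              · exact hc (Or.inr ⟨h.1, h.2.1, by omega⟩))]
    exact ih (k0+1) (by omega) (by omega) _ hs' hinv'

theorem pvRmatOuter (n : Int) (grid : List String) (hn : 0 ≤ n) :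
    ∀ (m : Nat) (i0 : Int), 1 ≤ i0 → i0 + m = n + 1 → ∀ a, pvBShape a (n+2).toNat →
    (∀ x y : Int, 0 ≤ x → 0 ≤ y → pvBget a x y =
      (if 1 ≤ x ∧ x < i0 ∧ 1 ≤ y ∧ y ≤ n then pvRspec n grid x y else false)) →
    (∀ x y : Int, 0 ≤ x → 0 ≤ y →
      pvBget ((PySem.List.pyRange i0 (n+1) 1).foldl (fun a i =>
        (PySem.List.pyRange 1 (n+1) 1).foldl (fun a k =>
          pvBset a i k ((pvBgrid n grid i k ^^ pvBgrid n grid (i-1) k) ^^ pvBget a (i-1) (k+1))) a) a) x y =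
      (if 1 ≤ x ∧ x < n+1 ∧ 1 ≤ y ∧ y ≤ n then pvRspec n grid x y else false)) := by
  intro m
  induction m with
  | zero =>
    intro i0 h1 h2 a hs hinv
    rw [show PySem.List.pyRange i0 (n+1) 1 = [] from PySem.List.pyRange_one_eq_nil (by omega)]
    simp only [List.foldl_nil]
    intro x y hx hy
    rw [hinv x y hx hy, show i0 = n+1 from by omega]
  | succ m ih =>
    intro i0 h1 h2 a hs hinv
    rw [show PySem.List.pyRange i0 (n+1) 1 = i0 :: PySem.List.pyRange (i0+1) (n+1) 1 from
          PySem.List.pyRange_one_cons (by omega), List.foldl_cons]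
    obtain ⟨hs', hinv'⟩ := pvRmatInner n grid hn i0 h1 (by omega) (n+1-1).toNat 1 (by omega) (by omega) a hs
      (by
        intro x y hx hy
        rw [hinv x y hx hy]
        by_cases hc : 1 ≤ x ∧ x < i0 ∧ 1 ≤ y ∧ y ≤ n
        · rw [if_pos hc, if_pos (Or.inl hc)]
        · rw [if_neg hc, if_neg (by
            intro hc'
            rcases hc' with h | h
            · exact hc h
            · omega)])
    exact ih (i0+1) (by omega) (by omega) _ hs' (by
      intro x y hx hy
      rw [hinv' x y hx hy]
      by_cases hc : 1 ≤ x ∧ x < i0+1 ∧ 1 ≤ y ∧ y ≤ n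
      · rw [if_pos (by
          rcases hc with ⟨a1, a2, a3, a4⟩
          by_cases hx0 : x < i0
          · exact Or.inl ⟨a1, hx0, a3, a4⟩
          · exact Or.inr ⟨by omega, a3, by omega⟩), if_pos hc]
      · rw [if_neg (by
          intro hc'
          rcases hc' with h | h
          · exact hc ⟨h.1, by omega, h.2.2.1, h.2.2.2⟩
          · exact hc ⟨by omega, by omega, h.2.1, by omega⟩), if_neg hc])

theorem pvRmat_spec (n : Int) (grid : List String) (hn : 0 ≤ n) (i k : Int)
    (hi0 : 0 ≤ i) (hin : i ≤ n) (hk1 : 1 ≤ k) (hkn : k ≤ n+1) :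
    pvBget (pvRmat n grid) i k = pvRspec n grid i k := by
  have h := pvRmatOuter n grid hn (n+1-1).toNat 1 (by omega) (by omega)
    (List.replicate (n+2).toNat (List.replicate (n+2).toNat false))
    (pvBShape_replicate _)
    (by
      intro x y hx hy
      rw [pvBget_replicate _ x y hx hy, if_neg (by omega)])
  have h2 := h i k hi0 (by omega)
  rw [show ((PySem.List.pyRange 1 (n+1) 1).foldl (fun a i =>
        (PySem.List.pyRange 1 (n+1) 1).foldl (fun a k =>
          pvBset a i k ((pvBgrid n grid i k ^^ pvBgrid n grid (i-1) k) ^^ pvBget a (i-1) (k+1))) a)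
        (List.replicate (n+2).toNat (List.replicate (n+2).toNat false))) = pvRmat n grid from rfl] at h2
  rw [h2]
  by_cases hc : 1 ≤ i ∧ i < n+1 ∧ 1 ≤ k ∧ k ≤ n
  · rw [if_pos hc]
  · rw [if_neg hc]
    by_cases hb : 1 ≤ i
    · rw [pvRspec_vanish n grid _ _ (by omega)]
    · rw [pvRspec_nonpos n grid _ _ (by omega)]

-- ----- Q matrix build -----

theorem pvQmatInner (n : Int) (grid : List String) (hn : 0 ≤ n) (j0 : Int)
    (h1 : 1 ≤ j0) (h2 : j0 ≤ n) :
    ∀ (m : Nat) (i0 : Int), 1 ≤ i0 → i0 + m = n + 1 → ∀ a, pvBShape a (n+2).toNat →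
    (∀ x y : Int, 0 ≤ x → 0 ≤ y → pvBget a x y =
      (if (1 ≤ x ∧ x ≤ n ∧ 1 ≤ y ∧ y < j0) ∨ (y = j0 ∧ 1 ≤ x ∧ x < i0) then pvQspec n grid x y else false)) →
    pvBShape ((PySem.List.pyRange i0 (n+1) 1).foldl (fun a i =>
      pvBset a i j0 ((pvBgrid n grid i j0 ^^ pvBgrid n grid i (j0-1)) ^^ pvBget a (i+1) (j0-1))) a) (n+2).toNat ∧
    (∀ x y : Int, 0 ≤ x → 0 ≤ y →
      pvBget ((PySem.List.pyRange i0 (n+1) 1).foldl (fun a i =>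
        pvBset a i j0 ((pvBgrid n grid i j0 ^^ pvBgrid n grid i (j0-1)) ^^ pvBget a (i+1) (j0-1))) a) x y =
      (if (1 ≤ x ∧ x ≤ n ∧ 1 ≤ y ∧ y < j0) ∨ (y = j0 ∧ 1 ≤ x ∧ x < n+1) then pvQspec n grid x y else false)) := by
  intro m
  induction m with
  | zero =>
    intro i0 hi1 hi2 a hs hinv
    rw [show PySem.List.pyRange i0 (n+1) 1 = [] from PySem.List.pyRange_one_eq_nil (by omega)]
    simp only [List.foldl_nil]
    exact ⟨hs, by intro x y hx hy; rw [hinv x y hx hy, show i0 = n+1 from by omega]⟩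
  | succ m ih =>
    intro i0 hi1 hi2 a hs hinv
    rw [show PySem.List.pyRange i0 (n+1) 1 = i0 :: PySem.List.pyRange (i0+1) (n+1) 1 from
          PySem.List.pyRange_one_cons (by omega), List.foldl_cons]
    have hm2 : ((n+2).toNat : Int) = n + 2 := by omega
    have hval : pvBget a (i0+1) (j0-1) = pvQspec n grid (i0+1) (j0-1) := by
      rw [hinv (i0+1) (j0-1) (by omega) (by omega)]
      by_cases ha : 1 ≤ j0 - 1
      · by_cases hb : i0 + 1 ≤ n
        · rw [if_pos (Or.inl ⟨by omega, hb, ha, by omega⟩)]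
        · rw [if_neg (by omega), pvQspec_vanish n grid _ _ (by omega)]
      · rw [if_neg (by omega), pvQspec_nonpos n grid _ _ (by omega)]
    have hwrite : ((pvBgrid n grid i0 j0 ^^ pvBgrid n grid i0 (j0-1)) ^^ pvBget a (i0+1) (j0-1))
        = pvQspec n grid i0 j0 := by
      rw [hval, ← pvQspec_pos n grid i0 j0 (by omega)]
    rw [hwrite]
    have hs' : pvBShape (pvBset a i0 j0 (pvQspec n grid i0 j0)) (n+2).toNat :=
      pvBShape_set a _ i0 j0 _ hs (by omega) (by omega)
    have hinv' : ∀ x y : Int, 0 ≤ x → 0 ≤ y →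
        pvBget (pvBset a i0 j0 (pvQspec n grid i0 j0)) x y =
        (if (1 ≤ x ∧ x ≤ n ∧ 1 ≤ y ∧ y < j0) ∨ (y = j0 ∧ 1 ≤ x ∧ x < i0+1) then pvQspec n grid x y else false) := by
      intro x y hx hy
      by_cases hxy : x = i0 ∧ y = j0
      · rw [hxy.1, hxy.2,
            pvBget_set_self a _ i0 j0 _ hs (by omega) (by omega) (by omega) (by omega),
            if_pos (Or.inr ⟨rfl, by omega, by omega⟩)]
      · have hne : x ≠ i0 ∨ y ≠ j0 := by tauto
        rw [pvBget_set_ne a i0 j0 x y _ (by omega) (by omega) hx hy hne, hinv x y hx hy]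
        by_cases hc : (1 ≤ x ∧ x ≤ n ∧ 1 ≤ y ∧ y < j0) ∨ (y = j0 ∧ 1 ≤ x ∧ x < i0)
        · rw [if_pos hc, if_pos (by rcases hc with h | h; exact Or.inl h; exact Or.inr ⟨h.1, h.2.1, by omega⟩)]
        · rw [if_neg hc, if_neg (by
            intro hc'
            rcases hc' with h | h
            · exact hc (Or.inl h)
            · rcases hne with hne | hne
              · exact hc (Or.inr ⟨h.1, h.2.1, by omega⟩)
              · exact hne h.1)]
    exact ih (i0+1) (by omega) (by omega) _ hs' hinv'

theorem pvQmatOuter (n : Int) (grid : List String) (hn : 0 ≤ n) :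
    ∀ (m : Nat) (j0 : Int), 1 ≤ j0 → j0 + m = n + 1 → ∀ a, pvBShape a (n+2).toNat →
    (∀ x y : Int, 0 ≤ x → 0 ≤ y → pvBget a x y =
      (if 1 ≤ x ∧ x ≤ n ∧ 1 ≤ y ∧ y < j0 then pvQspec n grid x y else false)) →
    (∀ x y : Int, 0 ≤ x → 0 ≤ y →
      pvBget ((PySem.List.pyRange j0 (n+1) 1).foldl (fun a j =>
        (PySem.List.pyRange 1 (n+1) 1).foldl (fun a i =>
          pvBset a i j ((pvBgrid n grid i j ^^ pvBgrid n grid i (j-1)) ^^ pvBget a (i+1) (j-1))) a) a) x y =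
      (if 1 ≤ x ∧ x ≤ n ∧ 1 ≤ y ∧ y < n+1 then pvQspec n grid x y else false)) := by
  intro m
  induction m with
  | zero =>
    intro j0 h1 h2 a hs hinv
    rw [show PySem.List.pyRange j0 (n+1) 1 = [] from PySem.List.pyRange_one_eq_nil (by omega)]
    simp only [List.foldl_nil]
    intro x y hx hy
    rw [hinv x y hx hy, show j0 = n+1 from by omega]
  | succ m ih =>
    intro j0 h1 h2 a hs hinv
    rw [show PySem.List.pyRange j0 (n+1) 1 = j0 :: PySem.List.pyRange (j0+1) (n+1) 1 from
          PySem.List.pyRange_one_cons (by omega), List.foldl_cons]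
    obtain ⟨hs', hinv'⟩ := pvQmatInner n grid hn j0 h1 (by omega) (n+1-1).toNat 1 (by omega) (by omega) a hs
      (by
        intro x y hx hy
        rw [hinv x y hx hy]
        by_cases hc : 1 ≤ x ∧ x ≤ n ∧ 1 ≤ y ∧ y < j0
        · rw [if_pos hc, if_pos (Or.inl hc)]
        · rw [if_neg hc, if_neg (by
            intro hc'
            rcases hc' with h | h
            · exact hc h
            · omega)])
    exact ih (j0+1) (by omega) (by omega) _ hs' (by
      intro x y hx hy
      rw [hinv' x y hx hy]
      by_cases hc : 1 ≤ x ∧ x ≤ n ∧ 1 ≤ y ∧ y < j0+1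
      · rw [if_pos (by
          rcases hc with ⟨a1, a2, a3, a4⟩
          by_cases hy0 : y < j0
          · exact Or.inl ⟨a1, a2, a3, hy0⟩
          · exact Or.inr ⟨by omega, a1, by omega⟩), if_pos hc]
      · rw [if_neg (by
          intro hc'
          rcases hc' with h | h
          · exact hc ⟨h.1, h.2.1, h.2.2.1, by omega⟩
          · exact hc ⟨h.2.1, by omega, by omega, by omega⟩), if_neg hc])

theorem pvQmat_spec (n : Int) (grid : List String) (hn : 0 ≤ n) (i j : Int)
    (hi1 : 1 ≤ i) (hin : i ≤ n+1) (hj0 : 0 ≤ j) (hjn : j ≤ n) :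
    pvBget (pvQmat n grid) i j = pvQspec n grid i j := by
  have h := pvQmatOuter n grid hn (n+1-1).toNat 1 (by omega) (by omega)
    (List.replicate (n+2).toNat (List.replicate (n+2).toNat false))
    (pvBShape_replicate _)
    (by
      intro x y hx hy
      rw [pvBget_replicate _ x y hx hy, if_neg (by omega)])
  have h2 := h i j (by omega) hj0
  rw [show ((PySem.List.pyRange 1 (n+1) 1).foldl (fun a j =>
        (PySem.List.pyRange 1 (n+1) 1).foldl (fun a i =>
          pvBset a i j ((pvBgrid n grid i j ^^ pvBgrid n grid i (j-1)) ^^ pvBget a (i+1) (j-1))) a)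
        (List.replicate (n+2).toNat (List.replicate (n+2).toNat false))) = pvQmat n grid from rfl] at h2
  rw [h2]
  by_cases hc : 1 ≤ i ∧ i ≤ n ∧ 1 ≤ j ∧ j < n+1
  · rw [if_pos hc]
  · rw [if_neg hc]
    by_cases hb : 1 ≤ j
    · rw [pvQspec_vanish n grid _ _ (by omega)]
    · rw [pvQspec_nonpos n grid _ _ (by omega)]

-- the loop body of B's port, with the two tables named
def pvBodyB (n : Int) (grid : List String) (ans k : Int) : Int :=
  let ans := (PySem.List.pyRange 1 k 1).foldl
    (fun ans i => if pvBget (pvRmat n grid) i k ^^ pvBget (pvRmat n grid) i (k+1) then ans + 1 else ans) ans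
  let ans := (PySem.List.pyRange 1 k 1).foldl
    (fun ans j => if pvBget (pvQmat n grid) k j ^^ pvBget (pvQmat n grid) (k+1) j then ans + 1 else ans) ans
  if (((pvBgrid n grid k k ^^ (pvBgrid n grid (k-1) k ^^ pvBget (pvRmat n grid) (k-1) (k+1))) ^^ pvBget (pvRmat n grid) k (k+1))
      ^^ (pvBgrid n grid k (k-1) ^^ pvBget (pvQmat n grid) (k+1) (k-1))) ^^ pvBget (pvQmat n grid) (k+1) k
  then ans + 1 else ans

theorem pvCntR (n : Int) (grid : List String) (hn : 0 ≤ n) (k : Int) (hk1 : 1 ≤ k) (hkn : k ≤ n) :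
    ∀ (m : Nat) (j0 : Int), 1 ≤ j0 → j0 + m = k → ∀ ans : Int,
    (PySem.List.pyRange j0 k 1).foldl
      (fun ans i => if pvBget (pvRmat n grid) i k ^^ pvBget (pvRmat n grid) i (k+1) then ans + 1 else ans) ans
    = ans + (pvRowCnt n grid k (k-1) - pvRowCnt n grid k (j0-1)) := by
  intro m
  induction m with
  | zero =>
    intro j0 h1 h2 ans
    rw [show PySem.List.pyRange j0 k 1 = [] from PySem.List.pyRange_one_eq_nil (by omega)]
    rw [List.foldl_nil, show j0 - 1 = k - 1 from by omega]
    omega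
  | succ m ih =>
    intro j0 h1 h2 ans
    rw [show PySem.List.pyRange j0 k 1 = j0 :: PySem.List.pyRange (j0+1) k 1 from
          PySem.List.pyRange_one_cons (by omega), List.foldl_cons]
    have hR1 : pvBget (pvRmat n grid) j0 k = pvRspec n grid j0 k :=
      pvRmat_spec n grid hn j0 k (by omega) (by omega) (by omega) (by omega)
    have hR2 : pvBget (pvRmat n grid) j0 (k+1) = pvRspec n grid j0 (k+1) :=
      pvRmat_spec n grid hn j0 (k+1) (by omega) (by omega) (by omega) (by omega)
    have hRow := pvRowCnt_pos n grid k j0 (by omega)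
    rw [hR1, hR2]
    cases hcc : (pvRspec n grid j0 k ^^ pvRspec n grid j0 (k+1)) with
    | true =>
      rw [if_pos rfl, ih (j0+1) (by omega) (by omega) (ans+1)]
      have : pvRowCnt n grid k j0 = pvRowCnt n grid k (j0-1) + 1 := by rw [hRow, hcc]; norm_num
      rw [show j0 + 1 - 1 = j0 from by ring]
      omega
    | false =>
      rw [if_neg Bool.false_ne_true, ih (j0+1) (by omega) (by omega) ans]
      have : pvRowCnt n grid k j0 = pvRowCnt n grid k (j0-1) := by rw [hRow, hcc]; norm_num
      rw [show j0 + 1 - 1 = j0 from by ring]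
      omega

theorem pvCntC (n : Int) (grid : List String) (hn : 0 ≤ n) (k : Int) (hk1 : 1 ≤ k) (hkn : k ≤ n) :
    ∀ (m : Nat) (j0 : Int), 1 ≤ j0 → j0 + m = k → ∀ ans : Int,
    (PySem.List.pyRange j0 k 1).foldl
      (fun ans j => if pvBget (pvQmat n grid) k j ^^ pvBget (pvQmat n grid) (k+1) j then ans + 1 else ans) ans
    = ans + (pvColCnt n grid k (k-1) - pvColCnt n grid k (j0-1)) := by
  intro m
  induction m with
  | zero =>
    intro j0 h1 h2 ans
    rw [show PySem.List.pyRange j0 k 1 = [] from PySem.List.pyRange_one_eq_nil (by omega)]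
    rw [List.foldl_nil, show j0 - 1 = k - 1 from by omega]
    omega
  | succ m ih =>
    intro j0 h1 h2 ans
    rw [show PySem.List.pyRange j0 k 1 = j0 :: PySem.List.pyRange (j0+1) k 1 from
          PySem.List.pyRange_one_cons (by omega), List.foldl_cons]
    have hQ1 : pvBget (pvQmat n grid) k j0 = pvQspec n grid k j0 :=
      pvQmat_spec n grid hn k j0 (by omega) (by omega) (by omega) (by omega)
    have hQ2 : pvBget (pvQmat n grid) (k+1) j0 = pvQspec n grid (k+1) j0 :=
      pvQmat_spec n grid hn (k+1) j0 (by omega) (by omega) (by omega) (by omega)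
    have hCol := pvColCnt_pos n grid k j0 (by omega)
    rw [hQ1, hQ2]
    cases hcc : (pvQspec n grid k j0 ^^ pvQspec n grid (k+1) j0) with
    | true =>
      rw [if_pos rfl, ih (j0+1) (by omega) (by omega) (ans+1)]
      have : pvColCnt n grid k j0 = pvColCnt n grid k (j0-1) + 1 := by rw [hCol, hcc]; norm_num
      rw [show j0 + 1 - 1 = j0 from by ring]
      omega
    | false =>
      rw [if_neg Bool.false_ne_true, ih (j0+1) (by omega) (by omega) ans]
      have : pvColCnt n grid k j0 = pvColCnt n grid k (j0-1) := by rw [hCol, hcc]; norm_num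
      rw [show j0 + 1 - 1 = j0 from by ring]
      omega

theorem pvBodyB_layer (n : Int) (grid : List String) (hn : 0 ≤ n) (k : Int)
    (hk1 : 1 ≤ k) (hkn : k ≤ n) (ans : Int) :
    pvBodyB n grid ans k = ans + pvLayer n grid k := by
  rw [pvBodyB]
  rw [pvCntR n grid hn k hk1 hkn (k-1).toNat 1 (by omega) (by omega) ans]
  rw [pvCntC n grid hn k hk1 hkn (k-1).toNat 1 (by omega) (by omega) _]
  rw [pvRmat_spec n grid hn (k-1) (k+1) (by omega) (by omega) (by omega) (by omega),
      pvRmat_spec n grid hn k (k+1) (by omega) (by omega) (by omega) (by omega),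
      pvQmat_spec n grid hn (k+1) (k-1) (by omega) (by omega) (by omega) (by omega),
      pvQmat_spec n grid hn (k+1) k (by omega) (by omega) (by omega) (by omega)]
  have hdiag : ((((pvBgrid n grid k k ^^ (pvBgrid n grid (k-1) k ^^ pvRspec n grid (k-1) (k+1))) ^^ pvRspec n grid k (k+1))
      ^^ (pvBgrid n grid k (k-1) ^^ pvQspec n grid (k+1) (k-1))) ^^ pvQspec n grid (k+1) k) = pvEspec n grid k := by
    rw [pvEspec, pvCspec, pvPspec]
  rw [hdiag, pvRowCnt_nonpos n grid k (1-1) (by omega), pvColCnt_nonpos n grid k (1-1) (by omega), pvLayer]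
  by_cases he : pvEspec n grid k
  · simp only [if_pos he]; omega
  · simp only [if_neg he]; omega

theorem pvAcc (n : Int) (grid : List String) (hn : 0 ≤ n) :
    ∀ (m : Nat) (k0 : Int), 1 ≤ k0 → k0 + m = n + 1 → ∀ ans : Int,
    (PySem.List.pyRange k0 (n+1) 1).foldl (pvBodyB n grid) ans
      = ans + (pvTotal n grid n - pvTotal n grid (k0-1)) := by
  intro m
  induction m with
  | zero =>
    intro k0 h1 h2 ans
    rw [show PySem.List.pyRange k0 (n+1) 1 = [] from PySem.List.pyRange_one_eq_nil (by omega)]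
    rw [List.foldl_nil, show k0 - 1 = n from by omega]
    omega
  | succ m ih =>
    intro k0 h1 h2 ans
    rw [show PySem.List.pyRange k0 (n+1) 1 = k0 :: PySem.List.pyRange (k0+1) (n+1) 1 from
          PySem.List.pyRange_one_cons (by omega), List.foldl_cons]
    rw [pvBodyB_layer n grid hn k0 (by omega) (by omega) ans]
    rw [ih (k0+1) (by omega) (by omega) _]
    have := pvTotal_pos n grid k0 (by omega)
    rw [show k0 + 1 - 1 = k0 from by ring]
    omega

theorem pvAltTotal (n : Int) (grid : List String) (hn : 0 ≤ n) :
    calculate_min_commands_alt n grid = pvTotal n grid n := by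
  rw [show calculate_min_commands_alt n grid
      = (PySem.List.pyRange 1 (n+1) 1).foldl (pvBodyB n grid) 0 from rfl]
  rw [pvAcc n grid hn (n+1-1).toNat 1 (by omega) (by omega) 0,
      pvTotal_nonpos n grid (1-1) (by omega)]
  omega

-- ========== assembly ==========

theorem pvMain (n : Int) (grid : List String) (hpre : Pre_calculate_min_commands n grid) :
    calculate_min_commands n grid = calculate_min_commands_alt n grid := by
  by_cases hn : 0 ≤ n
  · have hK : ((n.toNat : Nat) : Int) = n := by omega
    obtain ⟨hsh, horig⟩ := pvInit_facts n grid hn hpre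
    have hA : calculate_min_commands n grid
        = ((PySem.List.pyRange (n - 1) (-1) (-1)).foldl (pvIterB grid)
            (0, PySem.Set.empty, PySem.Set.empty)).1 := by
      unfold calculate_min_commands
      rw [show PySem.List.pyRange n 0 (-1) = PySem.List.pyRange ((n.toNat : Nat) : Int) 0 (-1) from by rw [hK],
          show n - 1 = ((n.toNat : Nat) : Int) - 1 from by omega]
      exact pvOuter n grid hn n.toNat (by omega) (pvInit n grid)
        (List.replicate (n+2).toNat 0) (List.replicate (n+2).toNat 0) 0
        PySem.Set.empty PySem.Set.empty hsh (by rw [hK] at horig; rw [hK]; exact horig)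
        (pvFrRel_zero n) (pvFrRel_zero n)
    rw [hA, pvAltTotal n grid hn,
        show n - 1 = ((n.toNat : Nat) : Int) - 1 from by omega]
    rw [pvIterTotal n grid n.toNat (by omega) 0 PySem.Set.empty PySem.Set.empty
          (by intro r _ _; rw [pvRspec_vanish n grid r _ (by omega)]; rfl)
          (by intro c _ _; rw [pvQspec_vanish n grid _ c (by omega)]; rfl)]
    rw [hK]
    omega
  · unfold calculate_min_commands calculate_min_commands_alt
    rw [PySem.List.pyRange_neg_one_eq_nil (by omega : n ≤ (0:Int)),
        PySem.List.pyRange_one_eq_nil (by omega : n + 1 ≤ (1:Int))]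
    rfl

-- ===== VERDICT (by name: the statement is the Claim_ definition above) =====
theorem calculate_min_commands_spec : Claim_equal_calculate_min_commands := by
  intro n grid _ hpre
  exact pvMain n grid hpre
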